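-- pv_equiv track=rewrite | github.com/CodingTest-lab/note_behindy | 프로그래머스/2/250136. ［PCCP 기출문제］ 2번 ／ 석유 시추/［PCCP 기출문제］ 2번 ／ 석유 시추.py | solution
-- ===== SOURCE A (Python) =====
-- def find_cluster(land, start_row, start_col, visited):
--     # 이미 방문한 클러스터라면 None 반환
--     if (start_row, start_col) in visited:
--         return None
--
--     cluster = set()  # 현재 클러스터의 모든 좌표를 저장
--     stack = [(start_row, start_col)]
--     cluster.add((start_row, start_col))
--
--     while stack:
--         row, col = stack.pop()
--         # 4방향 탐색
--         for next_row, next_col in [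
--             (row-1, col), (row+1, col),
--             (row, col-1), (row, col+1)
--         ]:
--             # 유효한 범위이고, 석유가 있고, 아직 클러스터에 포함되지 않은 지점이면
--             if (0 <= next_row < len(land) and
--                 0 <= next_col < len(land[0]) and
--                 land[next_row][next_col] == 1 and
--                 (next_row, next_col) not in cluster):
--                 stack.append((next_row, next_col))
--                 cluster.add((next_row, next_col))
--
--     # 클러스터의 좌표들과 크기를 반환
--     return cluster, len(cluster)
--
-- def solution(land):
--     n, m = len(land), len(land[0])
--     visited = set()  # 전체 방문 좌표
--     oil_by_column = [0] * m  # 각 열의 석유량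
--
--     # 모든 지점을 순회
--     for row in range(n):
--         for col in range(m):
--             # 석유가 있는 지점을 발견하면
--             if land[row][col] == 1:
--                 # 클러스터 탐색 시작
--                 result = find_cluster(land, row, col, visited)
--
--                 # 이미 방문한 클러스터가 아니라면
--                 if result is not None:
--                     cluster_coords, cluster_size = result
--                     # 방문 집합에 클러스터 좌표들 추가
--                     visited.update(cluster_coords)
--
--                     # 클러스터가 지나는 모든 열에 크기 기록
--                     affected_cols = set(coord[1] for coord in cluster_coords)
--                     for col_idx in affected_cols:
--                         oil_by_column[col_idx] += cluster_size
--
--     return max(oil_by_column)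
-- ===== SOURCE B (Python) =====
-- def solution(land):
--     n, m = len(land), len(land[0])
--     N = n * m
--     parent = list(range(N))
--
--     def find(x):
--         while parent[x] != x:
--             x = parent[x]
--         return x
--
--     def union(a, b):
--         ra, rb = find(a), find(b)
--         if ra != rb:
--             if ra < rb:
--                 parent[rb] = ra
--             else:
--                 parent[ra] = rb
--
--     # union each oil cell with its right and down oil neighbours
--     for i in range(n):
--         for j in range(m):
--             if land[i][j] == 1:
--                 if j + 1 < m and land[i][j + 1] == 1:
--                     union(i * m + j, i * m + j + 1)
--                 if i + 1 < n and land[i + 1][j] == 1: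
--                     union(i * m + j, (i + 1) * m + j)
--
--     # size of each component, indexed by its root
--     size = [0] * N
--     for i in range(n):
--         for j in range(m):
--             if land[i][j] == 1:
--                 r = find(i * m + j)
--                 size[r] += 1
--
--     best = 0
--     for j in range(m):
--         roots = {find(i * m + j) for i in range(n) if land[i][j] == 1}
--         best = max(best, sum(size[r] for r in roots))
--     return best
-- ===== Notes on version B (the rewrite author's own statement) =====
-- stated objective: alternative
-- what changed: Replaces the stack-based DFS flood fill with a shared visited set by a union-find (DSU) over cell indices row*m+col: one pass unions right/down oil neighbours, a second pass tallies component sizes by root, and each column sums the sizes of the distinct roots appearing in it.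
import Mathlib
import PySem

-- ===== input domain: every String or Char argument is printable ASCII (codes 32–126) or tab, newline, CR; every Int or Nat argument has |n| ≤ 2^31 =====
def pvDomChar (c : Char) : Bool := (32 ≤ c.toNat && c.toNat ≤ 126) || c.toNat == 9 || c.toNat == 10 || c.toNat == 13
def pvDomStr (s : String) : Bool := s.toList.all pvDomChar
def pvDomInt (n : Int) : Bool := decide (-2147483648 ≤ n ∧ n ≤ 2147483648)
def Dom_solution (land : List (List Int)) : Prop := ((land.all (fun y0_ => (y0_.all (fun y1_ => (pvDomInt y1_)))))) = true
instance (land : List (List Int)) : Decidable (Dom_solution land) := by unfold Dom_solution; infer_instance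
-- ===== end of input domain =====

-- B replaces A's stack DFS flood fill (shared visited set, per-component column set) by a
-- union-find over cell indices row*m+col; objective: alternative (different data structure).

-- ===== PORT A =====
-- land[r][c]; exact under Pre_solution (0 ≤ r < n, 0 ≤ c < m ≤ (land[r]).length)
def pvCellA (land : List (List Int)) (r c : Int) : Int :=
  PySem.List.pyGetD (PySem.List.pyGetD land r []) c 0

-- the 'while stack' loop of find_cluster; fuel n*m+1 is enough (each iteration strictly
-- decreases |stack| + (n*m - |cluster|)); stack head = Python's list end (append/pop site)
def pvClusterLoop (land : List (List Int)) (n m : Int) :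
    Nat → List (Int × Int) → PySem.Set (Int × Int) → PySem.Set (Int × Int)
  | 0, _, cl => cl
  | _ + 1, [], cl => cl
  | fuel + 1, q :: stack, cl =>
      let st := [(q.1 - 1, q.2), (q.1 + 1, q.2), (q.1, q.2 - 1), (q.1, q.2 + 1)].foldl
        (fun (st : List (Int × Int) × PySem.Set (Int × Int)) nb =>
          if 0 ≤ nb.1 ∧ nb.1 < n ∧ 0 ≤ nb.2 ∧ nb.2 < m ∧ pvCellA land nb.1 nb.2 = 1 ∧ nb ∉ st.2
          then (nb :: st.1, PySem.Set.add st.2 nb) else st)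
        (stack, cl)
      pvClusterLoop land n m fuel st.1 st.2

def pvFindCluster (land : List (List Int)) (n m : Int) (start : Int × Int)
    (visited : PySem.Set (Int × Int)) : Option (PySem.Set (Int × Int) × Int) :=
  if start ∈ visited then none
  else
    let cl := pvClusterLoop land n m (n.toNat * m.toNat + 1) [start]
      (PySem.Set.add PySem.Set.empty start)
    some (cl, (cl.length : Int))

def solution (land : List (List Int)) : Int :=
  let n : Int := (land.length : Int)
  let m : Int := ((land.head?.getD []).length : Int)   -- len(land[0]); land ≠ [] under Pre_solution
  let fin := (PySem.List.pyRange 0 n 1).foldl (fun st row =>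
      (PySem.List.pyRange 0 m 1).foldl (fun (st : PySem.Set (Int × Int) × List Int) col =>
        if pvCellA land row col = 1 then
          match pvFindCluster land n m (row, col) st.1 with
          | none => st
          | some (cl, size) =>
              let visited' := PySem.Set.update st.1 cl
              let affected : PySem.Set Int := PySem.Set.ofList (cl.map (·.2))
              let oil' := affected.foldl
                (fun oil c => PySem.List.pySetD oil c (PySem.List.pyGetD oil c 0 + size)) st.2
              (visited', oil')
        else st) st)
    (([] : PySem.Set (Int × Int)), List.replicate m.toNat (0 : Int))
  (PySem.List.max? fin.2 (fun x => x)).getD 0   -- max(oil_by_column); nonempty under Pre_solution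

-- ===== PORT B =====
def pvCellB (land : List (List Int)) (r c : Int) : Int :=
  PySem.List.pyGetD (PySem.List.pyGetD land r []) c 0

-- 'while parent[x] != x: x = parent[x]'; fuel |parent|+1 is enough since parent[x] ≤ x
def pvFind (parent : List Int) : Nat → Int → Int
  | 0, x => x
  | fuel + 1, x =>
      let p := PySem.List.pyGetD parent x 0
      if p = x then x else pvFind parent fuel p

def pvUnion (parent : List Int) (a b : Int) : List Int :=
  let ra := pvFind parent (parent.length + 1) a
  let rb := pvFind parent (parent.length + 1) b
  if ra = rb then parent
  else if ra < rb then PySem.List.pySetD parent rb ra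
  else PySem.List.pySetD parent ra rb

def solution_alt (land : List (List Int)) : Int :=
  let n : Int := (land.length : Int)
  let m : Int := ((land.head?.getD []).length : Int)   -- len(land[0]); land ≠ [] under Pre_solution
  let parent0 : List Int := PySem.List.pyRange 0 (n * m) 1   -- list(range(N))
  let parent := (PySem.List.pyRange 0 n 1).foldl (fun par i =>
      (PySem.List.pyRange 0 m 1).foldl (fun par j =>
        if pvCellB land i j = 1 then
          let par := if j + 1 < m ∧ pvCellB land i (j + 1) = 1
                     then pvUnion par (i * m + j) (i * m + j + 1) else par
          if i + 1 < n ∧ pvCellB land (i + 1) j = 1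
          then pvUnion par (i * m + j) ((i + 1) * m + j) else par
        else par) par) parent0
  let size := (PySem.List.pyRange 0 n 1).foldl (fun sz i =>
      (PySem.List.pyRange 0 m 1).foldl (fun (sz : List Int) j =>
        if pvCellB land i j = 1 then
          let r := pvFind parent (parent.length + 1) (i * m + j)
          PySem.List.pySetD sz r (PySem.List.pyGetD sz r 0 + 1)
        else sz) sz)
    (List.replicate (n.toNat * m.toNat) (0 : Int))
  (PySem.List.pyRange 0 m 1).foldl (fun best j =>
      let roots : PySem.Set Int := (PySem.List.pyRange 0 n 1).foldl
        (fun s i => if pvCellB land i j = 1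
                    then PySem.Set.add s (pvFind parent (parent.length + 1) (i * m + j)) else s) []
      let tot := roots.foldl (fun acc r => acc + PySem.List.pyGetD size r 0) 0
      max best tot) 0

-- ===== PRECONDITION & SPEC =====
-- Pre_solution = exactly the inputs where the Python A returns: a non-empty grid, a non-empty
-- first row, and every row at least as long as the first (otherwise A hits an IndexError
-- reading land[row][col], or ValueError at max([]) when the first row is empty).
def Pre_solution (land : List (List Int)) : Prop :=
  land ≠ [] ∧ (land.head?.getD []) ≠ [] ∧
    ∀ row ∈ land, (land.head?.getD []).length ≤ row.length
instance (land : List (List Int)) : Decidable (Pre_solution land) := by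
  unfold Pre_solution; infer_instance
def pvWitness_solution : List (List Int) := [[1, 0], [1, 1]]

def Spec_solution (land : List (List Int)) (out : Int) : Prop := out = solution_alt land
instance (land : List (List Int)) (out : Int) : Decidable (Spec_solution land out) := by
  unfold Spec_solution; infer_instance

-- ===== CLAIM (what is proved, stated in full; the proofs are below) =====
def Claim_equal_solution : Prop :=
  ∀ (land : List (List Int)), Dom_solution land → Pre_solution land →
    Spec_solution land (solution land)
-- ===== LEMMAS AND PROOFS =====

-- ---------- semantic layer: the grid graph and its connectivity ----------

def pvN (land : List (List Int)) : Int := (land.length : Int)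
def pvM (land : List (List Int)) : Int := ((land.head?.getD []).length : Int)

def pvOneB (land : List (List Int)) (p : Int × Int) : Bool :=
  decide (0 ≤ p.1 ∧ p.1 < pvN land ∧ 0 ≤ p.2 ∧ p.2 < pvM land ∧ pvCellA land p.1 p.2 = 1)

def pvNbs (p : Int × Int) : List (Int × Int) :=
  [(p.1 - 1, p.2), (p.1 + 1, p.2), (p.1, p.2 - 1), (p.1, p.2 + 1)]

def pvStep (land : List (List Int)) (p q : Int × Int) : Prop :=
  pvOneB land p = true ∧ pvOneB land q = true ∧ q ∈ pvNbs p

def pvConn (land : List (List Int)) (p q : Int × Int) : Prop :=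
  Relation.ReflTransGen (pvStep land) p q

def pvTouch (land : List (List Int)) (c : Int) (p : Int × Int) : Prop :=
  ∃ q, pvConn land p q ∧ q.2 = c

noncomputable def pvTouchD (land : List (List Int)) (c : Int) (p : Int × Int) : Bool :=
  @decide (pvTouch land c p) (Classical.propDecidable _)

def pvCells (land : List (List Int)) : List (Int × Int) :=
  (PySem.List.pyRange 0 (pvN land) 1).flatMap
    (fun r => (PySem.List.pyRange 0 (pvM land) 1).map (fun c => (r, c)))

def pvOnes (land : List (List Int)) : List (Int × Int) :=
  (pvCells land).filter (pvOneB land)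

noncomputable def pvColT (land : List (List Int)) (c : Int) : Int :=
  ((pvOnes land).countP (fun p => pvTouchD land c p) : Int)

noncomputable def pvCanon (land : List (List Int)) : Int :=
  ((PySem.List.pyRange 0 (pvM land) 1).map (fun c => pvColT land c)).foldl max 0

-- ---------- basic facts ----------

theorem pvTouchD_iff (land : List (List Int)) (c : Int) (p : Int × Int) :
    pvTouchD land c p = true ↔ pvTouch land c p := by
  unfold pvTouchD
  exact @decide_eq_true_iff _ (Classical.propDecidable _)

theorem pvOneB_iff (land : List (List Int)) (p : Int × Int) :
    pvOneB land p = true ↔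
      (0 ≤ p.1 ∧ p.1 < pvN land ∧ 0 ≤ p.2 ∧ p.2 < pvM land ∧ pvCellA land p.1 p.2 = 1) := by
  unfold pvOneB; exact decide_eq_true_iff

theorem pvNbs_symm (p q : Int × Int) : q ∈ pvNbs p → p ∈ pvNbs q := by
  rcases p with ⟨a, b⟩; rcases q with ⟨c, d⟩
  intro h
  simp only [pvNbs, List.mem_cons, List.not_mem_nil, or_false, Prod.mk.injEq] at h ⊢
  omega

theorem pvStep_symm (land : List (List Int)) (p q : Int × Int) :
    pvStep land p q → pvStep land q p := by
  rintro ⟨h1, h2, h3⟩; exact ⟨h2, h1, pvNbs_symm _ _ h3⟩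

theorem pvConn_symm (land : List (List Int)) (p q : Int × Int) :
    pvConn land p q → pvConn land q p := by
  intro h
  induction h with
  | refl => exact Relation.ReflTransGen.refl
  | tail _ hbc ih => exact Relation.ReflTransGen.head (pvStep_symm land _ _ hbc) ih

theorem pvConn_trans (land : List (List Int)) (p q r : Int × Int) :
    pvConn land p q → pvConn land q r → pvConn land p r :=
  fun h1 h2 => Relation.ReflTransGen.trans h1 h2

theorem pvConn_one (land : List (List Int)) (p q : Int × Int)
    (h : pvConn land p q) (hp : pvOneB land p = true) : pvOneB land q = true := by
  induction h with
  | refl => exact hp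
  | tail _ hbc _ => exact hbc.2.1

theorem pvMem_cells (land : List (List Int)) (p : Int × Int) :
    p ∈ pvCells land ↔ (0 ≤ p.1 ∧ p.1 < pvN land ∧ 0 ≤ p.2 ∧ p.2 < pvM land) := by
  rcases p with ⟨a, b⟩
  simp only [pvCells, List.mem_flatMap, List.mem_map, PySem.List.mem_pyRange_one,
    Prod.mk.injEq]
  constructor
  · rintro ⟨r, ⟨h1, h2⟩, c, ⟨h3, h4⟩, rfl, rfl⟩; exact ⟨h1, h2, h3, h4⟩
  · rintro ⟨h1, h2, h3, h4⟩; exact ⟨a, ⟨h1, h2⟩, b, ⟨h3, h4⟩, rfl, rfl⟩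

theorem pvNodup_cells (land : List (List Int)) : (pvCells land).Nodup := by
  unfold pvCells
  rw [List.nodup_flatMap]
  constructor
  · intro r _
    exact (PySem.List.nodup_pyRange_one 0 (pvM land)).map
      (fun c c' h => by simpa using congrArg Prod.snd h)
  · have hn := PySem.List.nodup_pyRange_one 0 (pvN land)
    refine hn.imp ?_
    intro a b hab
    intro x hx hy
    simp only [List.mem_map] at hx hy
    rcases hx with ⟨c, _, rfl⟩
    rcases hy with ⟨c', _, h2⟩
    exact hab (by simpa using (congrArg Prod.fst h2).symm)

theorem pvLen_cells (land : List (List Int)) :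
    (pvCells land).length = (pvN land).toNat * (pvM land).toNat := by
  simp [pvCells, List.length_flatMap, PySem.List.length_pyRange_one]

theorem pvOne_mem_cells (land : List (List Int)) (p : Int × Int)
    (h : pvOneB land p = true) : p ∈ pvCells land := by
  rw [pvMem_cells]; have := (pvOneB_iff land p).mp h; tauto

theorem pvNodup_ones (land : List (List Int)) : (pvOnes land).Nodup :=
  (pvNodup_cells land).filter _

-- count of members of S that touch column c
noncomputable def pvCnt (land : List (List Int)) (c : Int) (S : List (Int × Int)) : Int :=
  (S.countP (fun p => pvTouchD land c p) : Int)

-- nested foldl over a flatMap-ed index list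
theorem pvFoldl_flatMap {α β γ : Type} (l : List α) (g : α → List β)
    (F : γ → β → γ) (init : γ) :
    (l.flatMap g).foldl F init = l.foldl (fun st a => (g a).foldl F st) init := by
  induction l generalizing init with
  | nil => rfl
  | cons x xs ih => simp [List.flatMap_cons, List.foldl_append, ih]

-- countP of a disjunction of disjoint tests
theorem pvCountP_disj {α : Type} (l : List α) (pb qb : α → Bool)
    (h : ∀ x ∈ l, ¬(pb x = true ∧ qb x = true)) :
    l.countP (fun x => pb x || qb x) = l.countP pb + l.countP qb := by
  induction l with
  | nil => rfl
  | cons x xs ih =>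
      have hx := h x (List.mem_cons_self)
      have ihh := ih (fun y hy => h y (List.mem_cons_of_mem _ hy))
      rw [List.countP_cons, List.countP_cons, List.countP_cons, ihh]
      have hx := h x (List.mem_cons_self)
      by_cases h1 : pb x = true <;> by_cases h2 : qb x = true <;>
        simp [h1, h2] <;> first | omega | exact absurd ⟨h1, h2⟩ hx

-- ---------- A-side: the DFS cluster loop computes the connected component ----------

def pvGood (land : List (List Int)) (n m : Int) (x : Int × Int) : Prop :=
  0 ≤ x.1 ∧ x.1 < n ∧ 0 ≤ x.2 ∧ x.2 < m ∧ pvCellA land x.1 x.2 = 1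

theorem pvNbs_def (q : Int × Int) :
    [(q.1 - 1, q.2), (q.1 + 1, q.2), (q.1, q.2 - 1), (q.1, q.2 + 1)] = pvNbs q := rfl

theorem pvGood_iff_one (land : List (List Int)) (x : Int × Int) :
    pvGood land (pvN land) (pvM land) x ↔ pvOneB land x = true := by
  rw [pvOneB_iff]; rfl

-- effect of the neighbour fold in one iteration of the cluster loop
theorem pvNbFold_spec (land : List (List Int)) (n m : Int) (L : List (Int × Int)) :
    ∀ (stack : List (Int × Int)) (cl : PySem.Set (Int × Int)), cl.Nodup →
    ((L.foldl (fun (st : List (Int × Int) × PySem.Set (Int × Int)) nb =>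
        if 0 ≤ nb.1 ∧ nb.1 < n ∧ 0 ≤ nb.2 ∧ nb.2 < m ∧ pvCellA land nb.1 nb.2 = 1 ∧ nb ∉ st.2
        then (nb :: st.1, PySem.Set.add st.2 nb) else st) (stack, cl)).2.Nodup ∧
    (∀ x, x ∈ (L.foldl (fun (st : List (Int × Int) × PySem.Set (Int × Int)) nb =>
        if 0 ≤ nb.1 ∧ nb.1 < n ∧ 0 ≤ nb.2 ∧ nb.2 < m ∧ pvCellA land nb.1 nb.2 = 1 ∧ nb ∉ st.2
        then (nb :: st.1, PySem.Set.add st.2 nb) else st) (stack, cl)).2 ↔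
        x ∈ cl ∨ (x ∈ L ∧ pvGood land n m x)) ∧
    (∀ x, x ∈ (L.foldl (fun (st : List (Int × Int) × PySem.Set (Int × Int)) nb =>
        if 0 ≤ nb.1 ∧ nb.1 < n ∧ 0 ≤ nb.2 ∧ nb.2 < m ∧ pvCellA land nb.1 nb.2 = 1 ∧ nb ∉ st.2
        then (nb :: st.1, PySem.Set.add st.2 nb) else st) (stack, cl)).1 ↔
        x ∈ stack ∨ (x ∈ L ∧ pvGood land n m x ∧ x ∉ cl)) ∧
    ((L.foldl (fun (st : List (Int × Int) × PySem.Set (Int × Int)) nb =>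
        if 0 ≤ nb.1 ∧ nb.1 < n ∧ 0 ≤ nb.2 ∧ nb.2 < m ∧ pvCellA land nb.1 nb.2 = 1 ∧ nb ∉ st.2
        then (nb :: st.1, PySem.Set.add st.2 nb) else st) (stack, cl)).2.length + stack.length =
      (L.foldl (fun (st : List (Int × Int) × PySem.Set (Int × Int)) nb =>
        if 0 ≤ nb.1 ∧ nb.1 < n ∧ 0 ≤ nb.2 ∧ nb.2 < m ∧ pvCellA land nb.1 nb.2 = 1 ∧ nb ∉ st.2
        then (nb :: st.1, PySem.Set.add st.2 nb) else st) (stack, cl)).1.length + cl.length ∧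
      cl.length ≤ (L.foldl (fun (st : List (Int × Int) × PySem.Set (Int × Int)) nb =>
        if 0 ≤ nb.1 ∧ nb.1 < n ∧ 0 ≤ nb.2 ∧ nb.2 < m ∧ pvCellA land nb.1 nb.2 = 1 ∧ nb ∉ st.2
        then (nb :: st.1, PySem.Set.add st.2 nb) else st) (stack, cl)).2.length)) := by
  induction L with
  | nil =>
      intro stack cl hnd
      refine ⟨hnd, by simp, by simp, ?_, ?_⟩ <;> simp [List.foldl_nil, Nat.add_comm]
  | cons y L ih =>
      intro stack cl hnd
      simp only [List.foldl_cons]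
      by_cases hy : 0 ≤ y.1 ∧ y.1 < n ∧ 0 ≤ y.2 ∧ y.2 < m ∧ pvCellA land y.1 y.2 = 1 ∧ y ∉ cl
      · rw [if_pos hy]
        have hynew : y ∉ cl := hy.2.2.2.2.2
        have hadd : PySem.Set.add cl y = cl ++ [y] := PySem.Set.add_of_not_mem hynew
        have hnd' : (PySem.Set.add cl y).Nodup := by
          rw [hadd]
          exact hnd.append (List.nodup_singleton y)
            (by intro a ha hb; rw [List.mem_singleton] at hb; subst hb; exact hynew ha)
        obtain ⟨c1, c2, c3, c4, c5⟩ := ih (y :: stack) (PySem.Set.add cl y) hnd'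
        have hycl : ∀ x : Int × Int, (x ∈ PySem.Set.add cl y ↔ x ∈ cl ∨ x = y) := by
          intro x; rw [hadd]; simp
        have hygood : pvGood land n m y := ⟨hy.1, hy.2.1, hy.2.2.1, hy.2.2.2.1, hy.2.2.2.2.1⟩
        have hlen : (PySem.Set.add cl y).length = cl.length + 1 := by rw [hadd]; simp
        refine ⟨c1, ?_, ?_, ?_, ?_⟩
        · intro x
          rw [c2, hycl]
          simp only [List.mem_cons]
          constructor
          · rintro ((h | rfl) | ⟨h1, h2⟩)
            · exact Or.inl h
            · exact Or.inr ⟨Or.inl rfl, hygood⟩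
            · exact Or.inr ⟨Or.inr h1, h2⟩
          · rintro (h | ⟨(rfl | h1), h2⟩)
            · exact Or.inl (Or.inl h)
            · exact Or.inl (Or.inr rfl)
            · exact Or.inr ⟨h1, h2⟩
        · intro x
          rw [c3]
          simp only [List.mem_cons, hycl]
          constructor
          · rintro ((rfl | h) | ⟨h1, h2, h3⟩)
            · exact Or.inr ⟨Or.inl rfl, hygood, hynew⟩
            · exact Or.inl h
            · exact Or.inr ⟨Or.inr h1, h2, fun hc => h3 (Or.inl hc)⟩
          · rintro (h | ⟨(rfl | h1), h2, h3⟩)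
            · exact Or.inl (Or.inr h)
            · exact Or.inl (Or.inl rfl)
            · by_cases hxy : x = y
              · exact Or.inl (Or.inl hxy)
              · exact Or.inr ⟨h1, h2, fun hc => h3 (hc.resolve_right hxy)⟩
        · simp only [List.length_cons] at c4 ⊢
          omega
        · omega
      · rw [if_neg hy]
        obtain ⟨c1, c2, c3, c4, c5⟩ := ih stack cl hnd
        have hy' : ¬(pvGood land n m y ∧ y ∉ cl) := by
          rintro ⟨⟨g1, g2, g3, g4, g5⟩, h6⟩
          exact hy ⟨g1, g2, g3, g4, g5, h6⟩
        refine ⟨c1, ?_, ?_, c4, c5⟩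
        · intro x
          rw [c2]
          simp only [List.mem_cons]
          constructor
          · rintro (h | ⟨h1, h2⟩)
            · exact Or.inl h
            · exact Or.inr ⟨Or.inr h1, h2⟩
          · rintro (h | ⟨(rfl | h1), h2⟩)
            · exact Or.inl h
            · by_cases hxcl : x ∈ cl
              · exact Or.inl hxcl
              · exact absurd ⟨h2, hxcl⟩ hy'
            · exact Or.inr ⟨h1, h2⟩
        · intro x
          rw [c3]
          simp only [List.mem_cons]
          constructor
          · rintro (h | ⟨h1, h2, h3⟩)
            · exact Or.inl h
            · exact Or.inr ⟨Or.inr h1, h2, h3⟩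
          · rintro (h | ⟨(rfl | h1), h2, h3⟩)
            · exact Or.inl h
            · exact absurd ⟨h2, h3⟩ hy'
            · exact Or.inr ⟨h1, h2, h3⟩

theorem pvNodup_length_le {α : Type} [DecidableEq α] (l₁ l₂ : List α)
    (hnd : l₁.Nodup) (hsub : l₁ ⊆ l₂) : l₁.length ≤ l₂.length := by
  classical
  calc l₁.length = l₁.toFinset.card := (List.toFinset_card_of_nodup hnd).symm
    _ ≤ l₂.toFinset.card := Finset.card_le_card (fun x hx => by
        simp only [List.mem_toFinset] at hx ⊢; exact hsub hx)
    _ ≤ l₂.length := l₂.toFinset_card_le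

-- the cluster loop, run with enough fuel from an invariant state, returns a closed set
theorem pvClusterLoop_spec (land : List (List Int)) (s : Int × Int) :
    ∀ (fuel : Nat) (stack : List (Int × Int)) (cl : PySem.Set (Int × Int)),
    cl.Nodup → (∀ x ∈ stack, x ∈ cl) → s ∈ cl →
    (∀ x ∈ cl, pvOneB land x = true) →
    (∀ x ∈ cl, pvConn land s x) →
    (∀ x ∈ cl, x ∉ stack → ∀ r, pvStep land x r → r ∈ cl) →
    stack.length + ((pvN land).toNat * (pvM land).toNat - cl.length) < fuel →
    ((pvClusterLoop land (pvN land) (pvM land) fuel stack cl).Nodup ∧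
     s ∈ pvClusterLoop land (pvN land) (pvM land) fuel stack cl ∧
     (∀ x ∈ pvClusterLoop land (pvN land) (pvM land) fuel stack cl,
        pvOneB land x = true ∧ pvConn land s x) ∧
     (∀ x ∈ pvClusterLoop land (pvN land) (pvM land) fuel stack cl,
        ∀ r, pvStep land x r → r ∈ pvClusterLoop land (pvN land) (pvM land) fuel stack cl)) := by
  intro fuel
  induction fuel with
  | zero => intro stack cl _ _ _ _ _ _ hf; omega
  | succ fuel ih =>
      intro stack cl hnd hsub hs hone hconn hclosed hf
      match stack with
      | [] =>
          simp only [pvClusterLoop]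
          exact ⟨hnd, hs, fun x hx => ⟨hone x hx, hconn x hx⟩,
            fun x hx r hr => hclosed x hx (by simp) r hr⟩
      | q :: stack =>
          simp only [pvClusterLoop]
          rw [pvNbs_def q]
          obtain ⟨c1, c2, c3, c4, c5⟩ :=
            pvNbFold_spec land (pvN land) (pvM land) (pvNbs q) stack cl hnd
          set st := (pvNbs q).foldl (fun (st : List (Int × Int) × PySem.Set (Int × Int)) nb =>
              if 0 ≤ nb.1 ∧ nb.1 < (pvN land) ∧ 0 ≤ nb.2 ∧ nb.2 < (pvM land) ∧
                  pvCellA land nb.1 nb.2 = 1 ∧ nb ∉ st.2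
              then (nb :: st.1, PySem.Set.add st.2 nb) else st) (stack, cl) with hst
          have hq : q ∈ cl := hsub q List.mem_cons_self
          have hsub' : ∀ x ∈ st.1, x ∈ st.2 := by
            intro x hx
            rcases (c3 x).mp hx with h | ⟨h1, h2, _⟩
            · exact (c2 x).mpr (Or.inl (hsub x (List.mem_cons_of_mem _ h)))
            · exact (c2 x).mpr (Or.inr ⟨h1, h2⟩)
          have hs' : s ∈ st.2 := (c2 s).mpr (Or.inl hs)
          have hone' : ∀ x ∈ st.2, pvOneB land x = true := by
            intro x hx
            rcases (c2 x).mp hx with h | ⟨_, h2⟩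
            · exact hone x h
            · exact (pvGood_iff_one land x).mp h2
          have hconn' : ∀ x ∈ st.2, pvConn land s x := by
            intro x hx
            rcases (c2 x).mp hx with h | ⟨h1, h2⟩
            · exact hconn x h
            · exact Relation.ReflTransGen.tail (hconn q hq)
                ⟨hone q hq, (pvGood_iff_one land x).mp h2, h1⟩
          have hclosed' : ∀ x ∈ st.2, x ∉ st.1 → ∀ r, pvStep land x r → r ∈ st.2 := by
            intro x hx hxs r hr
            by_cases hxcl : x ∈ cl
            · by_cases hxq : x = q
              · subst hxq
                exact (c2 r).mpr (Or.inr ⟨hr.2.2, (pvGood_iff_one land r).mpr hr.2.1⟩)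
              · have hxstack : x ∉ stack := by
                  intro hc
                  exact hxs ((c3 x).mpr (Or.inl hc))
                have := hclosed x hxcl (by simp [hxq, hxstack]) r hr
                exact (c2 r).mpr (Or.inl this)
            · -- x was newly added, hence it is on the new stack: contradiction
              rcases (c2 x).mp hx with h | ⟨h1, h2⟩
              · exact absurd h hxcl
              · exact absurd ((c3 x).mpr (Or.inr ⟨h1, h2, hxcl⟩)) hxs
          have hlen : st.2.length ≤ (pvN land).toNat * (pvM land).toNat := by
            have hsubcells : st.2 ⊆ pvCells land := by
              intro x hx
              exact pvOne_mem_cells land x (hone' x hx)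
            have := pvNodup_length_le st.2 (pvCells land) c1 hsubcells
            rwa [pvLen_cells] at this
          have hf' : st.1.length + ((pvN land).toNat * (pvM land).toNat - st.2.length) < fuel := by
            simp only [List.length_cons] at hf
            omega
          exact ih st.1 st.2 c1 hsub' hs' hone' hconn' hclosed' hf'

-- a closed superset of s consisting of points connected to s IS the component of s
theorem pvClosed_iff (land : List (List Int)) (s : Int × Int) (out : List (Int × Int))
    (hs : s ∈ out) (hconn : ∀ x ∈ out, pvConn land s x)
    (hclosed : ∀ x ∈ out, ∀ r, pvStep land x r → r ∈ out) :
    ∀ x, x ∈ out ↔ pvConn land s x := by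
  intro x
  refine ⟨fun h => hconn x h, fun h => ?_⟩
  induction h with
  | refl => exact hs
  | tail hab hbc ih => exact hclosed _ ih _ hbc

theorem pvFindCluster_spec (land : List (List Int)) (s : Int × Int)
    (visited : PySem.Set (Int × Int)) (hone : pvOneB land s = true) (hnv : s ∉ visited) :
    ∃ CL : PySem.Set (Int × Int),
      pvFindCluster land (pvN land) (pvM land) s visited = some (CL, (CL.length : Int)) ∧
      CL.Nodup ∧ (∀ x, x ∈ CL ↔ pvConn land s x) := by
  unfold pvFindCluster
  rw [if_neg hnv]
  have hinit : PySem.Set.add PySem.Set.empty s = [s] := by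
    simp [PySem.Set.add, PySem.Set.empty]
  have hN : 1 ≤ (pvN land).toNat * (pvM land).toNat := by
    have := (pvOneB_iff land s).mp hone
    have h1 : 1 ≤ (pvN land).toNat := by omega
    have h2 : 1 ≤ (pvM land).toNat := by omega
    exact Nat.one_le_iff_ne_zero.mpr (by positivity)
  rw [hinit]
  obtain ⟨c1, c2, c3, c4⟩ := pvClusterLoop_spec land s
    ((pvN land).toNat * (pvM land).toNat + 1) [s] [s]
    (by simp) (by simp) (by simp) (by simpa using hone)
    (by intro x hx; rw [List.mem_singleton] at hx; subst hx; exact Relation.ReflTransGen.refl)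
    (by simp) (by simp; omega)
  refine ⟨_, rfl, c1, pvClosed_iff land s _ c2 (fun x hx => (c3 x hx).2) c4⟩

-- ---------- A-side: the outer loop ----------

def pvABody (land : List (List Int)) (st : PySem.Set (Int × Int) × List Int)
    (p : Int × Int) : PySem.Set (Int × Int) × List Int :=
  if pvCellA land p.1 p.2 = 1 then
    match pvFindCluster land (pvN land) (pvM land) p st.1 with
    | none => st
    | some (cl, size) =>
        (PySem.Set.update st.1 cl,
         (PySem.Set.ofList (cl.map (·.2))).foldl
           (fun oil c => PySem.List.pySetD oil c (PySem.List.pyGetD oil c 0 + size)) st.2)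
  else st

theorem pvSolution_eq (land : List (List Int)) :
    solution land =
      (PySem.List.max? ((pvCells land).foldl (pvABody land)
        (([] : PySem.Set (Int × Int)), List.replicate (pvM land).toNat (0 : Int))).2
        (fun x => x)).getD 0 := by
  unfold solution pvCells pvN pvM
  rw [pvFoldl_flatMap]
  simp only [List.foldl_map]
  rfl

-- the loop invariant of A's outer loop after processing the cells in P
def pvAInv (land : List (List Int)) (P : List (Int × Int))
    (st : PySem.Set (Int × Int) × List Int) : Prop :=
  st.1.Nodup ∧
  (∀ q, q ∈ st.1 ↔ ∃ p', p' ∈ P ∧ pvOneB land p' = true ∧ pvConn land p' q) ∧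
  st.2.length = (pvM land).toNat ∧
  (∀ k : Nat, k < (pvM land).toNat → st.2[k]? = some (pvCnt land (k : Int) st.1))

theorem pvOilUpd (land : List (List Int)) (sz : Int) :
    ∀ (cols : List Int), cols.Nodup → (∀ c ∈ cols, 0 ≤ c ∧ c < pvM land) →
    ∀ (oil : List Int), oil.length = (pvM land).toNat →
    ((cols.foldl (fun oil c =>
        PySem.List.pySetD oil c (PySem.List.pyGetD oil c 0 + sz)) oil).length = (pvM land).toNat ∧
     ∀ k : Nat, k < (pvM land).toNat →
       (cols.foldl (fun oil c =>
         PySem.List.pySetD oil c (PySem.List.pyGetD oil c 0 + sz)) oil)[k]? =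
       some ((oil[k]?.getD 0) + if (k : Int) ∈ cols then sz else 0)) := by
  intro cols
  induction cols with
  | nil =>
      intro _ _ oil hlen
      refine ⟨by simpa using hlen, fun k hk => ?_⟩
      rw [List.foldl_nil, List.getElem?_eq_getElem (by omega)]
      simp
  | cons c cols ih =>
      intro hnd hrange oil hlen
      have hc := hrange c List.mem_cons_self
      have hclen : c.toNat < oil.length := by omega
      have hset : PySem.List.pySetD oil c (PySem.List.pyGetD oil c 0 + sz) =
          oil.set c.toNat (oil.getD c.toNat 0 + sz) := by
        rw [PySem.List.pySetD_of_nonneg oil _ hc.1, PySem.List.pyGetD_of_nonneg oil _ hc.1]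
      simp only [List.foldl_cons, hset]
      obtain ⟨l1, l2⟩ := ih hnd.of_cons
        (fun c' hc' => hrange c' (List.mem_cons_of_mem _ hc'))
        (oil.set c.toNat (oil.getD c.toNat 0 + sz)) (by simp [hlen])
      refine ⟨l1, fun k hk => ?_⟩
      rw [l2 k hk]
      by_cases hk_eq : k = c.toNat
      · subst hk_eq
        have hcnotin : (c.toNat : Int) ∉ cols := by
          have : ((c.toNat : Nat) : Int) = c := by omega
          rw [this]
          exact (List.nodup_cons.mp hnd).1
        rw [if_neg hcnotin, add_zero]
        have hmem : ((c.toNat : Nat) : Int) ∈ c :: cols := by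
          have : ((c.toNat : Nat) : Int) = c := by omega
          rw [this]; exact List.mem_cons_self
        rw [if_pos hmem]
        rw [List.getElem?_set_self' ]
        rw [List.getElem?_eq_getElem (by omega : c.toNat < oil.length)]
        simp [List.getD_eq_getElem?_getD, List.getElem?_eq_getElem (by omega : c.toNat < oil.length)]
      · rw [List.getElem?_set_ne (fun h => hk_eq h.symm)]
        have hmem : ((k : Int) ∈ c :: cols) ↔ ((k : Int) ∈ cols) := by
          simp only [List.mem_cons]
          constructor
          · rintro (h | h)
            · exact absurd (by omega : k = c.toNat) hk_eq
            · exact h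
          · exact Or.inr
        rw [if_congr hmem rfl rfl]

theorem pvAStep (land : List (List Int)) (P : List (Int × Int)) (p : Int × Int)
    (st : PySem.Set (Int × Int) × List Int) (hp : p ∈ pvCells land)
    (hinv : pvAInv land P st) : pvAInv land (P ++ [p]) (pvABody land st p) := by
  obtain ⟨i1, i2, i3, i4⟩ := hinv
  have hmem_ext : ∀ q, (∃ p', p' ∈ P ∧ pvOneB land p' = true ∧ pvConn land p' q) →
      (∃ p', p' ∈ P ++ [p] ∧ pvOneB land p' = true ∧ pvConn land p' q) := by
    rintro q ⟨p', h1, h2, h3⟩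
    exact ⟨p', List.mem_append_left _ h1, h2, h3⟩
  by_cases hcell : pvCellA land p.1 p.2 = 1
  case neg =>
    -- p is not an oil cell: state unchanged, the new cell contributes nothing
    have hnone : pvOneB land p ≠ true := by
      intro hcontra
      rw [pvOneB_iff] at hcontra
      exact hcell hcontra.2.2.2.2
    rw [pvABody, if_neg hcell]
    refine ⟨i1, fun q => ?_, i3, i4⟩
    rw [i2]
    constructor
    · exact hmem_ext q
    · rintro ⟨p', h1, h2, h3⟩
      rcases List.mem_append.mp h1 with h1 | h1
      · exact ⟨p', h1, h2, h3⟩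
      · rw [List.mem_singleton] at h1; subst h1; exact absurd h2 hnone
  case pos =>
    have hone : pvOneB land p = true := by
      rw [pvOneB_iff]
      have := (pvMem_cells land p).mp hp
      exact ⟨this.1, this.2.1, this.2.2.1, this.2.2.2, hcell⟩
    by_cases hvis : p ∈ st.1
    · -- already visited: find_cluster returns None
      have hnone : pvFindCluster land (pvN land) (pvM land) p st.1 = none := by
        unfold pvFindCluster; rw [if_pos hvis]
      rw [pvABody, if_pos hcell, hnone]
      dsimp only
      refine ⟨i1, fun q => ?_, i3, i4⟩
      rw [i2]
      constructor
      · exact hmem_ext q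
      · rintro ⟨p', h1, h2, h3⟩
        rcases List.mem_append.mp h1 with h1 | h1
        · exact ⟨p', h1, h2, h3⟩
        · rw [List.mem_singleton] at h1
          rw [h1] at h3
          -- q is connected to p which is already visited
          obtain ⟨p'', g1, g2, g3⟩ := (i2 p).mp hvis
          exact ⟨p'', g1, g2, pvConn_trans land _ _ _ g3 h3⟩
    · -- new component
      obtain ⟨CL, hsome, hCLnd, hCLiff⟩ := pvFindCluster_spec land p st.1 hone hvis
      rw [pvABody, if_pos hcell, hsome]
      dsimp only
      have hdisj : ∀ x ∈ CL, x ∉ st.1 := by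
        intro x hx hxv
        obtain ⟨p', g1, g2, g3⟩ := (i2 x).mp hxv
        have hconn_px : pvConn land p x := (hCLiff x).mp hx
        have : pvConn land p' p :=
          pvConn_trans land _ _ _ g3 (pvConn_symm land _ _ hconn_px)
        exact hvis ((i2 p).mpr ⟨p', g1, g2, this⟩)
      have hupd : PySem.Set.update st.1 CL = st.1 ++ CL :=
        PySem.Set.update_eq_append_of_disjoint st.1 CL hCLnd hdisj
      have hndupd : (PySem.Set.update st.1 CL).Nodup := by
        rw [hupd]
        exact i1.append hCLnd (fun a ha hb => hdisj a hb ha)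
      constructor
      · exact hndupd
      constructor
      · intro q
        rw [hupd, List.mem_append, i2, hCLiff]
        constructor
        · rintro (⟨p', h1, h2, h3⟩ | h)
          · exact ⟨p', List.mem_append_left _ h1, h2, h3⟩
          · exact ⟨p, List.mem_append_right _ List.mem_cons_self, hone, h⟩
        · rintro ⟨p', h1, h2, h3⟩
          rcases List.mem_append.mp h1 with h1 | h1
          · exact Or.inl ⟨p', h1, h2, h3⟩
          · rw [List.mem_singleton] at h1; subst h1; exact Or.inr h3
      -- the oil array update
      have hcols_nd : (PySem.Set.ofList (CL.map (·.2))).Nodup := PySem.Set.nodup_ofList _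
      have hcols_range : ∀ c ∈ PySem.Set.ofList (CL.map (·.2)), 0 ≤ c ∧ c < pvM land := by
        intro c hc
        rw [PySem.Set.mem_ofList, List.mem_map] at hc
        obtain ⟨q, hq, rfl⟩ := hc
        have := (pvOneB_iff land q).mp (pvConn_one land p q ((hCLiff q).mp hq) hone)
        exact ⟨this.2.2.1, this.2.2.2.1⟩
      obtain ⟨o1, o2⟩ := pvOilUpd land (CL.length : Int)
        (PySem.Set.ofList (CL.map (·.2))) hcols_nd hcols_range st.2 i3
      refine ⟨o1, fun k hk => ?_⟩
      rw [o2 k hk, i4 k hk]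
      simp only [Option.getD_some]
      have hmemcols : ((k : Int) ∈ PySem.Set.ofList (CL.map (·.2))) ↔
          ∃ q ∈ CL, q.2 = (k : Int) := by
        rw [PySem.Set.mem_ofList]
        simp [List.mem_map]
      congr 1
      -- pvCnt over the appended visited set
      rw [hupd]
      unfold pvCnt
      rw [List.countP_append]
      push_cast
      congr 1
      by_cases htouch : ∃ q ∈ CL, q.2 = (k : Int)
      · rw [if_pos (hmemcols.mpr htouch)]
        have : CL.countP (fun x => pvTouchD land (k : Int) x) = CL.length := by
          rw [List.countP_eq_length]
          intro a ha
          obtain ⟨q0, hq0, hq0c⟩ := htouch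
          rw [pvTouchD_iff]
          exact ⟨q0, pvConn_trans land _ _ _
            (pvConn_symm land _ _ ((hCLiff a).mp ha)) ((hCLiff q0).mp hq0), hq0c⟩
        rw [this]
      · rw [if_neg (fun hc => htouch (hmemcols.mp hc))]
        have : CL.countP (fun x => pvTouchD land (k : Int) x) = 0 := by
          rw [List.countP_eq_zero]
          intro a ha hc
          rw [pvTouchD_iff] at hc
          obtain ⟨r, hr1, hr2⟩ := hc
          exact htouch ⟨r, (hCLiff r).mpr
            (pvConn_trans land _ _ _ ((hCLiff a).mp ha) hr1), hr2⟩
        rw [this]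
        simp

theorem pvAFold (land : List (List Int)) :
    ∀ (l P : List (Int × Int)) (st : PySem.Set (Int × Int) × List Int),
      P ++ l = pvCells land → pvAInv land P st →
      pvAInv land (pvCells land) (l.foldl (pvABody land) st) := by
  intro l
  induction l with
  | nil => intro P st hP hinv; rw [List.foldl_nil]; rw [List.append_nil] at hP; rwa [hP] at hinv
  | cons p l ih =>
      intro P st hP hinv
      rw [List.foldl_cons]
      have hp : p ∈ pvCells land := by
        rw [← hP]; exact List.mem_append_right _ List.mem_cons_self
      have := pvAStep land P p st hp hinv
      exact ih (P ++ [p]) _ (by simpa using hP) this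

theorem pvMaxD_eq (l : List Int) (hne : l ≠ []) (hnn : ∀ x ∈ l, 0 ≤ x) :
    (PySem.List.max? l (fun x => x)).getD 0 = l.foldl max 0 := by
  match l with
  | [] => exact absurd rfl hne
  | x :: t =>
      rw [PySem.List.max?_id_cons]
      simp only [Option.getD_some, List.foldl_cons]
      have : max 0 x = x := max_eq_right (hnn x List.mem_cons_self)
      rw [this]

-- ---------- A = canon ----------

theorem pvA_canon (land : List (List Int)) (h : Pre_solution land) :
    solution land = pvCanon land := by
  obtain ⟨h1, h2, h3⟩ := h
  have hm1 : 1 ≤ (pvM land).toNat := by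
    unfold pvM
    rcases hl : land.head?.getD [] with _ | ⟨a, r⟩
    · exact absurd hl h2
    · simp
  rw [pvSolution_eq]
  have hinv0 : pvAInv land [] (([] : PySem.Set (Int × Int)),
      List.replicate (pvM land).toNat (0 : Int)) := by
    refine ⟨List.nodup_nil, by simp, by simp, fun k hk => ?_⟩
    rw [List.getElem?_replicate]
    simp [hk, pvCnt]
  have hfin := pvAFold land (pvCells land) [] _ rfl hinv0
  obtain ⟨f1, f2, f3, f4⟩ := hfin
  set fin := (pvCells land).foldl (pvABody land)
    (([] : PySem.Set (Int × Int)), List.replicate (pvM land).toNat (0 : Int)) with hfin_def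
  -- the visited set finally holds exactly the oil cells
  have hvis : ∀ q, q ∈ fin.1 ↔ q ∈ pvOnes land := by
    intro q
    rw [f2]
    constructor
    · rintro ⟨p', _, h2', h3'⟩
      rw [pvOnes, List.mem_filter]
      have := pvConn_one land p' q h3' h2'
      exact ⟨pvOne_mem_cells land q this, this⟩
    · intro hq
      rw [pvOnes, List.mem_filter] at hq
      exact ⟨q, pvOne_mem_cells land q hq.2, hq.2, Relation.ReflTransGen.refl⟩
  have hperm : fin.1.Perm (pvOnes land) :=
    (List.perm_ext_iff_of_nodup f1 (pvNodup_ones land)).mpr hvis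
  have hcnt : ∀ k : Nat, pvCnt land (k : Int) fin.1 = pvColT land (k : Int) := by
    intro k
    unfold pvCnt pvColT
    rw [hperm.countP_eq]
  -- the oil list is the canonical column-total list
  have hoil : fin.2 = (PySem.List.pyRange 0 (pvM land) 1).map (fun c => pvColT land c) := by
    apply List.ext_getElem?
    intro k
    by_cases hk : k < (pvM land).toNat
    · rw [f4 k hk, hcnt k]
      rw [List.getElem?_map, PySem.List.getElem?_pyRange_one]
      simp [hk]
    · have hlen2 : ((PySem.List.pyRange 0 (pvM land) 1).map
          (fun c => pvColT land c)).length = (pvM land).toNat := by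
        simp [PySem.List.length_pyRange_one]
      rw [List.getElem?_eq_none (by omega), List.getElem?_eq_none (by omega)]
  rw [hoil]
  rw [pvMaxD_eq _ ?_ ?_]
  · rfl
  · intro hc
    have := congrArg List.length hc
    simp [PySem.List.length_pyRange_one] at this
    omega
  · intro x hx
    rw [List.mem_map] at hx
    obtain ⟨c, _, rfl⟩ := hx
    unfold pvColT
    positivity

-- ---------- B-side: union-find ----------

def pvEnc (land : List (List Int)) (p : Int × Int) : Int := p.1 * pvM land + p.2

def pvDec (land : List (List Int)) (x : Int) : Int × Int := (x / pvM land, x % pvM land)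

def pvNN (land : List (List Int)) : Int := pvN land * pvM land

theorem pvDec_enc (land : List (List Int)) (p : Int × Int)
    (h2 : 0 ≤ p.2) (h3 : p.2 < pvM land) : pvDec land (p.1 * pvM land + p.2) = p := by
  have hm : pvM land ≠ 0 := by omega
  unfold pvDec
  have hfst : (p.1 * pvM land + p.2) / pvM land = p.1 := by
    rw [add_comm, mul_comm, Int.add_mul_ediv_left _ _ hm, Int.ediv_eq_zero_of_lt h2 h3]
    omega
  have hsnd : (p.1 * pvM land + p.2) % pvM land = p.2 := by
    rw [add_comm, mul_comm, Int.add_mul_emod_self_left, Int.emod_eq_of_lt h2 h3]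
  rw [hfst, hsnd]

theorem pvEnc_range (land : List (List Int)) (p : Int × Int)
    (h : pvOneB land p = true) : 0 ≤ pvEnc land p ∧ pvEnc land p < pvNN land := by
  obtain ⟨h1, h2, h3, h4, _⟩ := (pvOneB_iff land p).mp h
  unfold pvEnc pvNN
  constructor
  · have : 0 ≤ p.1 * pvM land := mul_nonneg (by omega) (by omega)
    omega
  · have h5 : p.1 * pvM land ≤ (pvN land - 1) * pvM land :=
      mul_le_mul_of_nonneg_right (by omega) (by omega)
    nlinarith

theorem pvDec_one (land : List (List Int)) (p : Int × Int)
    (h : pvOneB land p = true) : pvDec land (pvEnc land p) = p := by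
  obtain ⟨_, _, h3, h4, _⟩ := (pvOneB_iff land p).mp h
  exact pvDec_enc land p h3 h4

-- parent entry read
def pvAt (parent : List Int) (x : Int) : Int := PySem.List.pyGetD parent x 0

def pvRoot (parent : List Int) (x : Int) : Int := pvFind parent (parent.length + 1) x

-- structural invariant: parent has the right length and entries point downwards
def pvPInv (land : List (List Int)) (parent : List Int) : Prop :=
  parent.length = (pvNN land).toNat ∧
  (∀ x : Int, 0 ≤ x → x < pvNN land → 0 ≤ pvAt parent x ∧ pvAt parent x ≤ x)

-- soundness invariant: a non-trivial parent edge stays inside one oil component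
def pvSInv (land : List (List Int)) (parent : List Int) : Prop :=
  ∀ x : Int, 0 ≤ x → x < pvNN land → pvAt parent x ≠ x →
    pvOneB land (pvDec land x) = true ∧ pvOneB land (pvDec land (pvAt parent x)) = true ∧
    pvConn land (pvDec land x) (pvDec land (pvAt parent x))

theorem pvAt_set (parent : List Int) (i v x : Int)
    (hi : 0 ≤ i) (hx : 0 ≤ x) (hxlen : x < (parent.length : Int)) :
    pvAt (parent.set i.toNat v) x = if x = i then v else pvAt parent x := by
  unfold pvAt
  rw [PySem.List.pyGetD_of_nonneg _ _ hx, PySem.List.pyGetD_of_nonneg _ _ hx]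
  rw [List.getD_eq_getElem?_getD, List.getD_eq_getElem?_getD]
  by_cases h : x = i
  · subst h
    rw [if_pos rfl, List.getElem?_set_self' ]
    rw [List.getElem?_eq_getElem (by omega : x.toNat < parent.length)]
    simp
  · rw [if_neg h, List.getElem?_set_ne (by omega)]

-- pvFind with any sufficient fuel computes the root: a fixpoint below x
theorem pvFind_core (land : List (List Int)) (parent : List Int)
    (hP : pvPInv land parent) :
    ∀ (k : Nat) (x : Int) (fuel : Nat), 0 ≤ x → x < pvNN land → x.toNat ≤ k →
      x < (fuel : Int) →
      (0 ≤ pvFind parent fuel x ∧ pvFind parent fuel x ≤ x ∧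
       pvFind parent fuel x < pvNN land ∧
       pvAt parent (pvFind parent fuel x) = pvFind parent fuel x ∧
       pvFind parent fuel x = pvRoot parent x) := by
  obtain ⟨hlen, hent⟩ := hP
  intro k
  induction k with
  | zero =>
      intro x fuel hx0 hxN hxk hxf
      have hx : x = 0 := by omega
      subst hx
      obtain ⟨e1, e2⟩ := hent 0 le_rfl hxN
      have hfix : pvAt parent 0 = 0 := by omega
      have hgen : ∀ f : Nat, (0 : Int) < (f : Int) → pvFind parent f 0 = 0 := by
        intro f hf
        match f with
        | 0 => simp at hf
        | f + 1 =>
            show (if pvAt parent 0 = 0 then (0 : Int) else pvFind parent f (pvAt parent 0)) = 0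
            rw [if_pos hfix]
      have h1 := hgen fuel hxf
      have h2 := hgen (parent.length + 1) (by push_cast; omega)
      unfold pvRoot
      rw [h1, h2]
      exact ⟨le_rfl, le_rfl, by omega, hfix, rfl⟩
  | succ k ih =>
      intro x fuel hx0 hxN hxk hxf
      obtain ⟨e1, e2⟩ := hent x hx0 hxN
      by_cases hfix : pvAt parent x = x
      · have hgen : ∀ f : Nat, x < (f : Int) → pvFind parent f x = x := by
          intro f hf
          match f with
          | 0 => omega
          | f + 1 =>
              show (if pvAt parent x = x then x else pvFind parent f (pvAt parent x)) = x
              rw [if_pos hfix]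
        have h1 := hgen fuel hxf
        have h2 := hgen (parent.length + 1) (by push_cast; omega)
        unfold pvRoot
        rw [h1, h2]
        exact ⟨hx0, le_rfl, hxN, hfix, rfl⟩
      · -- one step down the chain
        have hy : 0 ≤ pvAt parent x ∧ pvAt parent x < x := ⟨e1, by omega⟩
        have hstep : ∀ f : Nat, x < (f : Int) →
            pvFind parent f x = pvFind parent (f - 1) (pvAt parent x) := by
          intro f hf
          match f with
          | 0 => omega
          | f + 1 =>
              show (if pvAt parent x = x then x else pvFind parent f (pvAt parent x)) =
                pvFind parent (f + 1 - 1) (pvAt parent x)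
              rw [if_neg hfix]
              rfl
        have hyN : pvAt parent x < pvNN land := by omega
        have hyk : (pvAt parent x).toNat ≤ k := by omega
        obtain ⟨q1, q2, q3, q4, q5⟩ := ih (pvAt parent x) (fuel - 1) hy.1 hyN hyk (by omega)
        obtain ⟨w1, w2, w3, w4, w5⟩ := ih (pvAt parent x) (parent.length + 1 - 1) hy.1 hyN hyk
          (by push_cast; omega)
        have hroot : pvRoot parent x = pvRoot parent (pvAt parent x) := by
          unfold pvRoot
          rw [hstep (parent.length + 1) (by push_cast; omega)]
          exact w5
        rw [hstep fuel hxf]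
        refine ⟨q1, by omega, q3, q4, ?_⟩
        rw [q5, hroot]

theorem pvRoot_spec (land : List (List Int)) (parent : List Int)
    (hP : pvPInv land parent) (x : Int) (hx0 : 0 ≤ x) (hxN : x < pvNN land) :
    0 ≤ pvRoot parent x ∧ pvRoot parent x ≤ x ∧ pvRoot parent x < pvNN land ∧
      pvAt parent (pvRoot parent x) = pvRoot parent x := by
  have := pvFind_core land parent hP x.toNat x (parent.length + 1) hx0 hxN le_rfl
    (by have := hP.1; push_cast; omega)
  exact ⟨this.1, this.2.1, this.2.2.1, this.2.2.2.1⟩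

theorem pvRoot_fix (land : List (List Int)) (parent : List Int)
    (hP : pvPInv land parent) (x : Int) (hx0 : 0 ≤ x) (hxN : x < pvNN land)
    (h : pvAt parent x = x) : pvRoot parent x = x := by
  unfold pvRoot
  have hall : ∀ f : Nat, pvFind parent f x = x := by
    intro f
    match f with
    | 0 => rfl
    | f + 1 =>
        show (if pvAt parent x = x then x else pvFind parent f (pvAt parent x)) = x
        rw [if_pos h]
  exact hall _

theorem pvRoot_step (land : List (List Int)) (parent : List Int)
    (hP : pvPInv land parent) (x : Int) (hx0 : 0 ≤ x) (hxN : x < pvNN land)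
    (h : pvAt parent x ≠ x) : pvRoot parent x = pvRoot parent (pvAt parent x) := by
  have hlen := hP.1
  have he := hP.2 x hx0 hxN
  have hy0 : 0 ≤ pvAt parent x := he.1
  have hyN : pvAt parent x < pvNN land := by omega
  have hc := pvFind_core land parent hP (pvAt parent x).toNat (pvAt parent x)
    parent.length hy0 hyN le_rfl (by push_cast; omega)
  calc pvRoot parent x
      = pvFind parent parent.length (pvAt parent x) := by
        show (if pvAt parent x = x then x else pvFind parent parent.length (pvAt parent x)) = _
        rw [if_neg h]
    _ = pvRoot parent (pvAt parent x) := hc.2.2.2.2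

-- the root is connected to its argument (or equal to it)
theorem pvRoot_conn (land : List (List Int)) (parent : List Int)
    (hP : pvPInv land parent) (hS : pvSInv land parent) :
    ∀ (k : Nat) (x : Int), 0 ≤ x → x < pvNN land → x.toNat ≤ k →
      pvRoot parent x = x ∨
      (pvOneB land (pvDec land x) = true ∧
       pvOneB land (pvDec land (pvRoot parent x)) = true ∧
       pvConn land (pvDec land x) (pvDec land (pvRoot parent x))) := by
  intro k
  induction k with
  | zero =>
      intro x hx0 hxN hxk
      have hx : x = 0 := by omega
      subst hx
      have he := hP.2 0 le_rfl hxN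
      exact Or.inl (pvRoot_fix land parent hP 0 le_rfl hxN (by omega))
  | succ k ih =>
      intro x hx0 hxN hxk
      by_cases hfix : pvAt parent x = x
      · exact Or.inl (pvRoot_fix land parent hP x hx0 hxN hfix)
      · have he := hP.2 x hx0 hxN
        obtain ⟨s1, s2, s3⟩ := hS x hx0 hxN hfix
        have hy0 : 0 ≤ pvAt parent x := he.1
        have hyN : pvAt parent x < pvNN land := by omega
        have hstep := pvRoot_step land parent hP x hx0 hxN hfix
        rcases ih (pvAt parent x) hy0 hyN (by omega) with h | ⟨t1, t2, t3⟩
        · rw [hstep, h]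
          exact Or.inr ⟨s1, s2, s3⟩
        · rw [hstep]
          exact Or.inr ⟨s1, t2, pvConn_trans land _ _ _ s3 t3⟩

-- linking root r2 under root r1 < r2 updates every root by 'collapse r2 to r1'
theorem pvLink_spec (land : List (List Int)) (parent : List Int)
    (hP : pvPInv land parent) (hS : pvSInv land parent) (r1 r2 : Int)
    (h10 : 0 ≤ r1) (h1N : r1 < pvNN land) (h20 : 0 ≤ r2) (h2N : r2 < pvNN land)
    (hfix1 : pvAt parent r1 = r1) (hfix2 : pvAt parent r2 = r2) (hlt : r1 < r2)
    (hone1 : pvOneB land (pvDec land r1) = true)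
    (hone2 : pvOneB land (pvDec land r2) = true)
    (hconn : pvConn land (pvDec land r2) (pvDec land r1)) :
    pvPInv land (parent.set r2.toNat r1) ∧ pvSInv land (parent.set r2.toNat r1) ∧
    (∀ x : Int, 0 ≤ x → x < pvNN land →
      pvRoot (parent.set r2.toNat r1) x =
        if pvRoot parent x = r2 then r1 else pvRoot parent x) := by
  have hlen := hP.1
  have hlen' : (parent.set r2.toNat r1).length = (pvNN land).toNat := by
    rw [List.length_set]; exact hlen
  have hAt : ∀ x : Int, 0 ≤ x → x < pvNN land →
      pvAt (parent.set r2.toNat r1) x = if x = r2 then r1 else pvAt parent x := by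
    intro x hx0 hxN
    exact pvAt_set parent r2 r1 x h20 hx0 (by push_cast; omega)
  have hP' : pvPInv land (parent.set r2.toNat r1) := by
    refine ⟨hlen', fun x hx0 hxN => ?_⟩
    rw [hAt x hx0 hxN]
    by_cases h : x = r2
    · rw [if_pos h]; omega
    · rw [if_neg h]; exact hP.2 x hx0 hxN
  have hS' : pvSInv land (parent.set r2.toNat r1) := by
    intro x hx0 hxN hne
    rw [hAt x hx0 hxN] at hne ⊢
    by_cases h : x = r2
    · subst h
      rw [if_pos rfl]
      exact ⟨hone2, hone1, hconn⟩
    · rw [if_neg h] at hne ⊢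
      exact hS x hx0 hxN hne
  refine ⟨hP', hS', ?_⟩
  -- roots after the link, by strong induction down the chains
  have main : ∀ (k : Nat) (x : Int), 0 ≤ x → x < pvNN land → x.toNat ≤ k →
      pvRoot (parent.set r2.toNat r1) x =
        if pvRoot parent x = r2 then r1 else pvRoot parent x := by
    intro k
    induction k with
    | zero =>
        intro x hx0 hxN hxk
        have hx : x = 0 := by omega
        subst hx
        have he := hP.2 0 le_rfl hxN
        have hfix : pvAt parent 0 = 0 := by omega
        have hr := pvRoot_fix land parent hP 0 le_rfl hxN hfix
        by_cases h02 : (0 : Int) = r2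
        · omega
        · have hfix' : pvAt (parent.set r2.toNat r1) 0 = 0 := by
            rw [hAt 0 le_rfl hxN, if_neg h02]; exact hfix
          rw [pvRoot_fix land _ hP' 0 le_rfl hxN hfix', hr, if_neg h02]
    | succ k ih =>
        intro x hx0 hxN hxk
        by_cases hx2 : x = r2
        · subst hx2
          -- new edge x → r1
          have hedge : pvAt (parent.set x.toNat r1) x = r1 := by
            rw [hAt x hx0 hxN, if_pos rfl]
          have hroot_x : pvRoot parent x = x := pvRoot_fix land parent hP x hx0 hxN hfix2
          have hne : pvAt (parent.set x.toNat r1) x ≠ x := by omega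
          rw [pvRoot_step land _ hP' x hx0 hxN hne, hedge]
          have hr1fix' : pvAt (parent.set x.toNat r1) r1 = r1 := by
            rw [hAt r1 h10 h1N, if_neg (by omega)]; exact hfix1
          rw [pvRoot_fix land _ hP' r1 h10 h1N hr1fix', hroot_x, if_pos rfl]
        · by_cases hfix : pvAt parent x = x
          · have hfix' : pvAt (parent.set r2.toNat r1) x = x := by
              rw [hAt x hx0 hxN, if_neg hx2]; exact hfix
            rw [pvRoot_fix land _ hP' x hx0 hxN hfix',
              pvRoot_fix land parent hP x hx0 hxN hfix, if_neg hx2]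
          · have he := hP.2 x hx0 hxN
            have hy0 : 0 ≤ pvAt parent x := he.1
            have hyN : pvAt parent x < pvNN land := by omega
            have hAtx : pvAt (parent.set r2.toNat r1) x = pvAt parent x := by
              rw [hAt x hx0 hxN, if_neg hx2]
            have hne' : pvAt (parent.set r2.toNat r1) x ≠ x := by rw [hAtx]; exact hfix
            rw [pvRoot_step land _ hP' x hx0 hxN hne', hAtx,
              pvRoot_step land parent hP x hx0 hxN hfix]
            exact ih (pvAt parent x) hy0 hyN (by omega)
  exact fun x hx0 hxN => main x.toNat x hx0 hxN le_rfl

-- the union operation of port B: invariants survive, roots collapse by a function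
theorem pvUnion_spec (land : List (List Int)) (parent : List Int)
    (hP : pvPInv land parent) (hS : pvSInv land parent) (a b : Int)
    (ha0 : 0 ≤ a) (haN : a < pvNN land) (hb0 : 0 ≤ b) (hbN : b < pvNN land)
    (honea : pvOneB land (pvDec land a) = true)
    (honeb : pvOneB land (pvDec land b) = true)
    (hconn : pvConn land (pvDec land a) (pvDec land b)) :
    pvPInv land (pvUnion parent a b) ∧ pvSInv land (pvUnion parent a b) ∧
    (∃ f : Int → Int,
      (∀ x : Int, 0 ≤ x → x < pvNN land →
        pvRoot (pvUnion parent a b) x = f (pvRoot parent x)) ∧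
      pvRoot (pvUnion parent a b) a = pvRoot (pvUnion parent a b) b) := by
  have hra := pvRoot_spec land parent hP a ha0 haN
  have hrb := pvRoot_spec land parent hP b hb0 hbN
  have hconn_ra : pvOneB land (pvDec land (pvRoot parent a)) = true ∧
      pvConn land (pvDec land a) (pvDec land (pvRoot parent a)) := by
    rcases pvRoot_conn land parent hP hS a.toNat a ha0 haN le_rfl with h | ⟨_, t2, t3⟩
    · rw [h]; exact ⟨honea, Relation.ReflTransGen.refl⟩
    · exact ⟨t2, t3⟩
  have hconn_rb : pvOneB land (pvDec land (pvRoot parent b)) = true ∧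
      pvConn land (pvDec land b) (pvDec land (pvRoot parent b)) := by
    rcases pvRoot_conn land parent hP hS b.toNat b hb0 hbN le_rfl with h | ⟨_, t2, t3⟩
    · rw [h]; exact ⟨honeb, Relation.ReflTransGen.refl⟩
    · exact ⟨t2, t3⟩
  have hU : pvUnion parent a b =
      (if pvRoot parent a = pvRoot parent b then parent
       else if pvRoot parent a < pvRoot parent b then
         PySem.List.pySetD parent (pvRoot parent b) (pvRoot parent a)
       else PySem.List.pySetD parent (pvRoot parent a) (pvRoot parent b)) := rfl
  rw [hU]
  by_cases heq : pvRoot parent a = pvRoot parent b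
  · rw [if_pos heq]
    exact ⟨hP, hS, fun x => x, fun x _ _ => rfl, by rw [heq]⟩
  · rw [if_neg heq]
    by_cases hlt : pvRoot parent a < pvRoot parent b
    · rw [if_pos hlt]
      have hset : PySem.List.pySetD parent (pvRoot parent b) (pvRoot parent a) =
          parent.set (pvRoot parent b).toNat (pvRoot parent a) :=
        PySem.List.pySetD_of_nonneg parent _ hrb.1
      rw [hset]
      obtain ⟨hP', hS', hroots⟩ := pvLink_spec land parent hP hS
        (pvRoot parent a) (pvRoot parent b) hra.1 hra.2.2.1 hrb.1 hrb.2.2.1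
        hra.2.2.2 hrb.2.2.2 hlt hconn_ra.1 hconn_rb.1
        (pvConn_trans land _ _ _ (pvConn_symm land _ _ hconn_rb.2)
          (pvConn_trans land _ _ _ (pvConn_symm land _ _ hconn) hconn_ra.2))
      refine ⟨hP', hS', fun r => if r = pvRoot parent b then pvRoot parent a else r,
        fun x hx0 hxN => hroots x hx0 hxN, ?_⟩
      rw [hroots a ha0 haN, hroots b hb0 hbN, if_neg heq, if_pos rfl]
    · rw [if_neg hlt]
      have hlt' : pvRoot parent b < pvRoot parent a := by omega
      have hset : PySem.List.pySetD parent (pvRoot parent a) (pvRoot parent b) =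
          parent.set (pvRoot parent a).toNat (pvRoot parent b) :=
        PySem.List.pySetD_of_nonneg parent _ hra.1
      rw [hset]
      obtain ⟨hP', hS', hroots⟩ := pvLink_spec land parent hP hS
        (pvRoot parent b) (pvRoot parent a) hrb.1 hrb.2.2.1 hra.1 hra.2.2.1
        hrb.2.2.2 hra.2.2.2 hlt' hconn_rb.1 hconn_ra.1
        (pvConn_trans land _ _ _ (pvConn_symm land _ _ hconn_ra.2)
          (pvConn_trans land _ _ _ hconn hconn_rb.2))
      refine ⟨hP', hS', fun r => if r = pvRoot parent a then pvRoot parent b else r,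
        fun x hx0 hxN => hroots x hx0 hxN, ?_⟩
      rw [hroots a ha0 haN, hroots b hb0 hbN, if_pos rfl, if_neg (fun h => heq h.symm)]

-- ---------- B-side: the three passes of port B ----------

theorem pvCellB_eq (land : List (List Int)) (r c : Int) :
    pvCellB land r c = pvCellA land r c := rfl

theorem pvNN_toNat (land : List (List Int)) :
    (pvNN land).toNat = (pvN land).toNat * (pvM land).toNat := by
  unfold pvNN pvN pvM
  have h : ((land.length : Int) * ((land.head?.getD []).length : Int)) =
      (((land.length * (land.head?.getD []).length : Nat)) : Int) := by push_cast; ring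
  rw [h, Int.toNat_natCast]
  simp

def pvPar (land : List (List Int)) : List Int :=
  (PySem.List.pyRange 0 (pvN land) 1).foldl (fun par i =>
      (PySem.List.pyRange 0 (pvM land) 1).foldl (fun par j =>
        if pvCellB land i j = 1 then
          let par := if j + 1 < pvM land ∧ pvCellB land i (j + 1) = 1
                     then pvUnion par (i * pvM land + j) (i * pvM land + j + 1) else par
          if i + 1 < pvN land ∧ pvCellB land (i + 1) j = 1
          then pvUnion par (i * pvM land + j) ((i + 1) * pvM land + j) else par
        else par) par)
    (PySem.List.pyRange 0 (pvN land * pvM land) 1)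

def pvSz (land : List (List Int)) : List Int :=
  (PySem.List.pyRange 0 (pvN land) 1).foldl (fun sz i =>
      (PySem.List.pyRange 0 (pvM land) 1).foldl (fun (sz : List Int) j =>
        if pvCellB land i j = 1 then
          let r := pvFind (pvPar land) ((pvPar land).length + 1) (i * pvM land + j)
          PySem.List.pySetD sz r (PySem.List.pyGetD sz r 0 + 1)
        else sz) sz)
    (List.replicate ((pvN land).toNat * (pvM land).toNat) (0 : Int))

def pvBBody3 (land : List (List Int)) (best : Int) (j : Int) : Int :=
  let roots : PySem.Set Int := (PySem.List.pyRange 0 (pvN land) 1).foldl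
    (fun s i => if pvCellB land i j = 1
                then PySem.Set.add s (pvFind (pvPar land) ((pvPar land).length + 1)
                  (i * pvM land + j)) else s) []
  let tot := roots.foldl (fun acc r => acc + PySem.List.pyGetD (pvSz land) r 0) 0
  max best tot

theorem pvSolutionAlt_eq (land : List (List Int)) :
    solution_alt land = (PySem.List.pyRange 0 (pvM land) 1).foldl (pvBBody3 land) 0 := rfl

def pvBBody1 (land : List (List Int)) (par : List Int) (p : Int × Int) : List Int :=
  if pvCellB land p.1 p.2 = 1 then
    let par := if p.2 + 1 < pvM land ∧ pvCellB land p.1 (p.2 + 1) = 1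
               then pvUnion par (p.1 * pvM land + p.2) (p.1 * pvM land + p.2 + 1) else par
    if p.1 + 1 < pvN land ∧ pvCellB land (p.1 + 1) p.2 = 1
    then pvUnion par (p.1 * pvM land + p.2) ((p.1 + 1) * pvM land + p.2) else par
  else par

def pvBBody2 (land : List (List Int)) (parent sz : List Int) (p : Int × Int) : List Int :=
  if pvCellB land p.1 p.2 = 1 then
    let r := pvFind parent (parent.length + 1) (p.1 * pvM land + p.2)
    PySem.List.pySetD sz r (PySem.List.pyGetD sz r 0 + 1)
  else sz

theorem pvPar_flat (land : List (List Int)) :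
    pvPar land = (pvCells land).foldl (pvBBody1 land)
      (PySem.List.pyRange 0 (pvN land * pvM land) 1) := by
  unfold pvPar pvCells
  rw [pvFoldl_flatMap]
  simp only [List.foldl_map]
  rfl

theorem pvSz_flat (land : List (List Int)) :
    pvSz land = (pvCells land).foldl (pvBBody2 land (pvPar land))
      (List.replicate ((pvN land).toNat * (pvM land).toNat) (0 : Int)) := by
  unfold pvSz pvCells
  rw [pvFoldl_flatMap]
  simp only [List.foldl_map]
  rfl

-- the pass-1 invariant: structural + soundness + all processed adjacencies united
def pvU1Inv (land : List (List Int)) (P : List (Int × Int)) (par : List Int) : Prop :=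
  pvPInv land par ∧ pvSInv land par ∧
  ∀ p ∈ P, pvOneB land p = true →
    ((p.2 + 1 < pvM land ∧ pvCellB land p.1 (p.2 + 1) = 1) →
       pvRoot par (p.1 * pvM land + p.2) = pvRoot par (p.1 * pvM land + p.2 + 1)) ∧
    ((p.1 + 1 < pvN land ∧ pvCellB land (p.1 + 1) p.2 = 1) →
       pvRoot par (p.1 * pvM land + p.2) = pvRoot par ((p.1 + 1) * pvM land + p.2))

theorem pvRight_one (land : List (List Int)) (p : Int × Int)
    (hone : pvOneB land p = true)
    (hc : p.2 + 1 < pvM land ∧ pvCellB land p.1 (p.2 + 1) = 1) :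
    pvOneB land (p.1, p.2 + 1) = true := by
  obtain ⟨h1, h2, h3, h4, _⟩ := (pvOneB_iff land p).mp hone
  rw [pvOneB_iff]
  exact ⟨h1, h2, by omega, hc.1, hc.2⟩

theorem pvDown_one (land : List (List Int)) (p : Int × Int)
    (hone : pvOneB land p = true)
    (hc : p.1 + 1 < pvN land ∧ pvCellB land (p.1 + 1) p.2 = 1) :
    pvOneB land (p.1 + 1, p.2) = true := by
  obtain ⟨h1, h2, h3, h4, _⟩ := (pvOneB_iff land p).mp hone
  rw [pvOneB_iff]
  exact ⟨by omega, hc.1, h3, h4, hc.2⟩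

theorem pvU1Step' (land : List (List Int)) (P : List (Int × Int)) (p : Int × Int)
    (par : List Int) (hp : p ∈ pvCells land) (hinv : pvU1Inv land P par) :
    pvU1Inv land (P ++ [p]) (pvBBody1 land par p) := by
  obtain ⟨hP, hS, hpairs⟩ := hinv
  by_cases hcell : pvCellB land p.1 p.2 = 1
  case neg =>
    rw [pvBBody1, if_neg hcell]
    refine ⟨hP, hS, fun p' hp' hone' => ?_⟩
    rcases List.mem_append.mp hp' with h | h
    · exact hpairs p' h hone'
    · rw [List.mem_singleton] at h; subst h
      rw [pvOneB_iff] at hone'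
      rw [pvCellB_eq] at hcell
      exact absurd hone'.2.2.2.2 hcell
  case pos =>
    have hone : pvOneB land p = true := by
      rw [pvOneB_iff]
      have := (pvMem_cells land p).mp hp
      rw [pvCellB_eq] at hcell
      exact ⟨this.1, this.2.1, this.2.2.1, this.2.2.2, hcell⟩
    have hrange := pvEnc_range land p hone
    rw [pvBBody1, if_pos hcell]
    -- first (conditional) union: right neighbour
    by_cases hc1 : p.2 + 1 < pvM land ∧ pvCellB land p.1 (p.2 + 1) = 1
    case pos =>
      have honeq : pvOneB land (p.1, p.2 + 1) = true := pvRight_one land p hone hc1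
      have hrangeq := pvEnc_range land (p.1, p.2 + 1) honeq
      have hencq : pvEnc land (p.1, p.2 + 1) = p.1 * pvM land + p.2 + 1 := by
        unfold pvEnc; ring
      have hstep : pvStep land p (p.1, p.2 + 1) := by
        refine ⟨hone, honeq, ?_⟩
        rcases p with ⟨a, b⟩
        simp [pvNbs]
      obtain ⟨hP1, hS1, f1, hf1, he1⟩ := pvUnion_spec land par hP hS
        (p.1 * pvM land + p.2) (p.1 * pvM land + p.2 + 1)
        hrange.1 hrange.2 (by rw [← hencq]; exact hrangeq.1) (by rw [← hencq]; exact hrangeq.2)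
        (by rw [show p.1 * pvM land + p.2 = pvEnc land p from rfl, pvDec_one land p hone]; exact hone)
        (by rw [← hencq, pvDec_one land _ honeq]; exact honeq)
        (by rw [← hencq, show p.1 * pvM land + p.2 = pvEnc land p from rfl,
             pvDec_one land p hone, pvDec_one land _ honeq]
            exact Relation.ReflTransGen.single hstep)
      rw [if_pos hc1]
      set par1 := pvUnion par (p.1 * pvM land + p.2) (p.1 * pvM land + p.2 + 1) with hpar1
      -- second (conditional) union: down neighbour
      by_cases hc2 : p.1 + 1 < pvN land ∧ pvCellB land (p.1 + 1) p.2 = 1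
      case pos =>
        have honer : pvOneB land (p.1 + 1, p.2) = true := pvDown_one land p hone hc2
        have hranger := pvEnc_range land (p.1 + 1, p.2) honer
        have hencr : pvEnc land (p.1 + 1, p.2) = (p.1 + 1) * pvM land + p.2 := rfl
        have hstep2 : pvStep land p (p.1 + 1, p.2) := by
          refine ⟨hone, honer, ?_⟩
          rcases p with ⟨a, b⟩
          simp [pvNbs]
        obtain ⟨hP2, hS2, f2, hf2, he2⟩ := pvUnion_spec land par1 hP1 hS1
          (p.1 * pvM land + p.2) ((p.1 + 1) * pvM land + p.2)
          hrange.1 hrange.2 (by rw [← hencr]; exact hranger.1) (by rw [← hencr]; exact hranger.2)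
          (by rw [show p.1 * pvM land + p.2 = pvEnc land p from rfl, pvDec_one land p hone]; exact hone)
          (by rw [← hencr, pvDec_one land _ honer]; exact honer)
          (by rw [← hencr, show p.1 * pvM land + p.2 = pvEnc land p from rfl,
               pvDec_one land p hone, pvDec_one land _ honer]
              exact Relation.ReflTransGen.single hstep2)
        rw [if_pos hc2]
        refine ⟨hP2, hS2, fun p' hp' hone' => ?_⟩
        rcases List.mem_append.mp hp' with h | h
        · obtain ⟨hr, hd⟩ := hpairs p' h hone'
          have hrange' := pvEnc_range land p' hone'
          constructor
          · intro hcc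
            have honeq' : pvOneB land (p'.1, p'.2 + 1) = true := pvRight_one land p' hone' hcc
            have hrangeq' := pvEnc_range land (p'.1, p'.2 + 1) honeq'
            have hencq' : pvEnc land (p'.1, p'.2 + 1) = p'.1 * pvM land + p'.2 + 1 := by
              unfold pvEnc; ring
            rw [hencq'] at hrangeq'
            rw [hf2 (p'.1 * pvM land + p'.2) hrange'.1 hrange'.2,
              hf2 (p'.1 * pvM land + p'.2 + 1) hrangeq'.1 hrangeq'.2,
              hf1 (p'.1 * pvM land + p'.2) hrange'.1 hrange'.2,
              hf1 (p'.1 * pvM land + p'.2 + 1) hrangeq'.1 hrangeq'.2, hr hcc]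
          · intro hcc
            have honer' : pvOneB land (p'.1 + 1, p'.2) = true := pvDown_one land p' hone' hcc
            have hranger' := pvEnc_range land (p'.1 + 1, p'.2) honer'
            have hencr' : pvEnc land (p'.1 + 1, p'.2) = (p'.1 + 1) * pvM land + p'.2 := rfl
            rw [hencr'] at hranger'
            rw [hf2 (p'.1 * pvM land + p'.2) hrange'.1 hrange'.2,
              hf2 ((p'.1 + 1) * pvM land + p'.2) hranger'.1 hranger'.2,
              hf1 (p'.1 * pvM land + p'.2) hrange'.1 hrange'.2,
              hf1 ((p'.1 + 1) * pvM land + p'.2) hranger'.1 hranger'.2, hd hcc]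
        · rw [List.mem_singleton] at h; subst h
          refine ⟨fun _ => ?_, fun _ => he2⟩
          -- the right-union equality survives the second union
          have hb0 : (0 : Int) ≤ p'.1 * pvM land + p'.2 + 1 := by
            have := pvEnc_range land (p'.1, p'.2 + 1) honeq
            unfold pvEnc at this
            omega
          have hbN : p'.1 * pvM land + p'.2 + 1 < pvNN land := by
            have := pvEnc_range land (p'.1, p'.2 + 1) honeq
            unfold pvEnc at this
            omega
          rw [hf2 (p'.1 * pvM land + p'.2) hrange.1 hrange.2,
            hf2 (p'.1 * pvM land + p'.2 + 1) hb0 hbN, he1]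
      case neg =>
        rw [if_neg hc2]
        refine ⟨hP1, hS1, fun p' hp' hone' => ?_⟩
        rcases List.mem_append.mp hp' with h | h
        · obtain ⟨hr, hd⟩ := hpairs p' h hone'
          have hrange' := pvEnc_range land p' hone'
          constructor
          · intro hcc
            have honeq' := pvRight_one land p' hone' hcc
            have hrangeq' := pvEnc_range land (p'.1, p'.2 + 1) honeq'
            have hencq' : pvEnc land (p'.1, p'.2 + 1) = p'.1 * pvM land + p'.2 + 1 := by
              unfold pvEnc; ring
            rw [hencq'] at hrangeq'
            rw [hf1 (p'.1 * pvM land + p'.2) hrange'.1 hrange'.2,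
            hf1 (p'.1 * pvM land + p'.2 + 1) hrangeq'.1 hrangeq'.2, hr hcc]
          · intro hcc
            have honer' := pvDown_one land p' hone' hcc
            have hranger' := pvEnc_range land (p'.1 + 1, p'.2) honer'
            have hencr' : pvEnc land (p'.1 + 1, p'.2) = (p'.1 + 1) * pvM land + p'.2 := rfl
            rw [hencr'] at hranger'
            rw [hf1 (p'.1 * pvM land + p'.2) hrange'.1 hrange'.2,
            hf1 ((p'.1 + 1) * pvM land + p'.2) hranger'.1 hranger'.2, hd hcc]
        · rw [List.mem_singleton] at h; subst h
          exact ⟨fun _ => he1, fun hcc => absurd hcc hc2⟩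
    case neg =>
      rw [if_neg hc1]
      by_cases hc2 : p.1 + 1 < pvN land ∧ pvCellB land (p.1 + 1) p.2 = 1
      case pos =>
        have honer : pvOneB land (p.1 + 1, p.2) = true := pvDown_one land p hone hc2
        have hranger := pvEnc_range land (p.1 + 1, p.2) honer
        have hencr : pvEnc land (p.1 + 1, p.2) = (p.1 + 1) * pvM land + p.2 := rfl
        have hstep2 : pvStep land p (p.1 + 1, p.2) := by
          refine ⟨hone, honer, ?_⟩
          rcases p with ⟨a, b⟩
          simp [pvNbs]
        obtain ⟨hP2, hS2, f2, hf2, he2⟩ := pvUnion_spec land par hP hS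
          (p.1 * pvM land + p.2) ((p.1 + 1) * pvM land + p.2)
          hrange.1 hrange.2 (by rw [← hencr]; exact hranger.1) (by rw [← hencr]; exact hranger.2)
          (by rw [show p.1 * pvM land + p.2 = pvEnc land p from rfl, pvDec_one land p hone]; exact hone)
          (by rw [← hencr, pvDec_one land _ honer]; exact honer)
          (by rw [← hencr, show p.1 * pvM land + p.2 = pvEnc land p from rfl,
               pvDec_one land p hone, pvDec_one land _ honer]
              exact Relation.ReflTransGen.single hstep2)
        rw [if_pos hc2]
        refine ⟨hP2, hS2, fun p' hp' hone' => ?_⟩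
        rcases List.mem_append.mp hp' with h | h
        · obtain ⟨hr, hd⟩ := hpairs p' h hone'
          have hrange' := pvEnc_range land p' hone'
          constructor
          · intro hcc
            have honeq' := pvRight_one land p' hone' hcc
            have hrangeq' := pvEnc_range land (p'.1, p'.2 + 1) honeq'
            have hencq' : pvEnc land (p'.1, p'.2 + 1) = p'.1 * pvM land + p'.2 + 1 := by
              unfold pvEnc; ring
            rw [hencq'] at hrangeq'
            rw [hf2 (p'.1 * pvM land + p'.2) hrange'.1 hrange'.2,
            hf2 (p'.1 * pvM land + p'.2 + 1) hrangeq'.1 hrangeq'.2, hr hcc]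
          · intro hcc
            have honer' := pvDown_one land p' hone' hcc
            have hranger' := pvEnc_range land (p'.1 + 1, p'.2) honer'
            have hencr' : pvEnc land (p'.1 + 1, p'.2) = (p'.1 + 1) * pvM land + p'.2 := rfl
            rw [hencr'] at hranger'
            rw [hf2 (p'.1 * pvM land + p'.2) hrange'.1 hrange'.2,
            hf2 ((p'.1 + 1) * pvM land + p'.2) hranger'.1 hranger'.2, hd hcc]
        · rw [List.mem_singleton] at h; subst h
          exact ⟨fun hcc => absurd hcc hc1, fun _ => he2⟩
      case neg =>
        rw [if_neg hc2]
        refine ⟨hP, hS, fun p' hp' hone' => ?_⟩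
        rcases List.mem_append.mp hp' with h | h
        · exact hpairs p' h hone'
        · rw [List.mem_singleton] at h; subst h
          exact ⟨fun hcc => absurd hcc hc1, fun hcc => absurd hcc hc2⟩

theorem pvU1Fold (land : List (List Int)) :
    ∀ (l P : List (Int × Int)) (par : List Int),
      P ++ l = pvCells land → pvU1Inv land P par →
      pvU1Inv land (pvCells land) (l.foldl (pvBBody1 land) par) := by
  intro l
  induction l with
  | nil => intro P par hP hinv; rw [List.foldl_nil]; rw [List.append_nil] at hP; rwa [hP] at hinv
  | cons p l ih =>
      intro P par hP hinv
      rw [List.foldl_cons]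
      have hp : p ∈ pvCells land := by
        rw [← hP]; exact List.mem_append_right _ List.mem_cons_self
      exact ih (P ++ [p]) _ (by simpa using hP) (pvU1Step' land P p par hp hinv)

theorem pvU1_init (land : List (List Int)) :
    pvU1Inv land [] (PySem.List.pyRange 0 (pvN land * pvM land) 1) := by
  refine ⟨⟨?_, ?_⟩, ?_, by simp⟩
  · rw [PySem.List.length_pyRange_one]
    unfold pvNN
    simp
  · intro x hx0 hxN
    have hat : pvAt (PySem.List.pyRange 0 (pvN land * pvM land) 1) x = x := by
      unfold pvAt
      rw [PySem.List.pyGetD_of_nonneg _ _ hx0, List.getD_eq_getElem?_getD,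
        PySem.List.getElem?_pyRange_one]
      rw [if_pos (by unfold pvNN at hxN; omega)]
      simp
      omega
    omega
  · intro x hx0 hxN hne
    have hat : pvAt (PySem.List.pyRange 0 (pvN land * pvM land) 1) x = x := by
      unfold pvAt
      rw [PySem.List.pyGetD_of_nonneg _ _ hx0, List.getD_eq_getElem?_getD,
        PySem.List.getElem?_pyRange_one]
      rw [if_pos (by unfold pvNN at hxN; omega)]
      simp
      omega
    exact absurd hat hne

theorem pvParInv (land : List (List Int)) : pvU1Inv land (pvCells land) (pvPar land) := by
  rw [pvPar_flat]
  exact pvU1Fold land (pvCells land) [] _ rfl (pvU1_init land)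

-- connected one-cells have equal roots
theorem pvRootEq_step (land : List (List Int)) (p q : Int × Int)
    (h : pvStep land p q) :
    pvRoot (pvPar land) (pvEnc land p) = pvRoot (pvPar land) (pvEnc land q) := by
  obtain ⟨hP, hS, hpairs⟩ := pvParInv land
  obtain ⟨hone, honeq, hmem⟩ := h
  rcases p with ⟨a, b⟩
  obtain ⟨h1, h2, h3, h4, h5⟩ := (pvOneB_iff land (a, b)).mp hone
  obtain ⟨g1, g2, g3, g4, g5⟩ := (pvOneB_iff land q).mp honeq
  simp only [pvNbs, List.mem_cons, List.not_mem_nil, or_false] at hmem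
  rcases hmem with rfl | rfl | rfl | rfl
  · -- q = (a - 1, b): down-pair at q
    have hq_mem : (a - 1, b) ∈ pvCells land := pvOne_mem_cells land _ honeq
    have := (hpairs (a - 1, b) hq_mem honeq).2
      ⟨by simpa using h2, by rw [pvCellB_eq]; simpa using h5⟩
    have he1 : pvEnc land (a - 1, b) = (a - 1) * pvM land + b := rfl
    have he2 : pvEnc land (a, b) = (a - 1 + 1) * pvM land + b := by unfold pvEnc; ring
    rw [he1, he2]
    simp only at this
    exact this.symm
  · -- q = (a + 1, b): down-pair at p
    have hp_mem : (a, b) ∈ pvCells land := pvOne_mem_cells land _ hone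
    have := (hpairs (a, b) hp_mem hone).2
      ⟨by simpa using g2, by rw [pvCellB_eq]; simpa using g5⟩
    exact this
  · -- q = (a, b - 1): right-pair at q
    have hq_mem : (a, b - 1) ∈ pvCells land := pvOne_mem_cells land _ honeq
    have := (hpairs (a, b - 1) hq_mem honeq).1
      ⟨by simpa using h4, by rw [pvCellB_eq]; simpa using h5⟩
    have he1 : pvEnc land (a, b - 1) = a * pvM land + (b - 1) := rfl
    have he2 : pvEnc land (a, b) = a * pvM land + (b - 1) + 1 := by unfold pvEnc; ring
    rw [he1, he2]
    simp only at this
    exact this.symm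
  · -- q = (a, b + 1): right-pair at p
    have hp_mem : (a, b) ∈ pvCells land := pvOne_mem_cells land _ hone
    have := (hpairs (a, b) hp_mem hone).1
      ⟨by simpa using g4, by rw [pvCellB_eq]; simpa using g5⟩
    have he2 : pvEnc land (a, b + 1) = a * pvM land + b + 1 := by unfold pvEnc; ring
    rw [he2]
    exact this

theorem pvRootEq_conn (land : List (List Int)) (p q : Int × Int)
    (hone : pvOneB land p = true) (h : pvConn land p q) :
    pvRoot (pvPar land) (pvEnc land p) = pvRoot (pvPar land) (pvEnc land q) := by
  induction h with
  | refl => rfl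
  | tail hab hbc ih => exact ih.trans (pvRootEq_step land _ _ hbc)

theorem pvConn_of_rootEq (land : List (List Int)) (p q : Int × Int)
    (honep : pvOneB land p = true) (honeq : pvOneB land q = true)
    (h : pvRoot (pvPar land) (pvEnc land p) = pvRoot (pvPar land) (pvEnc land q)) :
    pvConn land p q := by
  obtain ⟨hP, hS, _⟩ := pvParInv land
  have hrp := pvEnc_range land p honep
  have hrq := pvEnc_range land q honeq
  have hcp := pvRoot_conn land (pvPar land) hP hS (pvEnc land p).toNat (pvEnc land p)
    hrp.1 hrp.2 le_rfl
  have hcq := pvRoot_conn land (pvPar land) hP hS (pvEnc land q).toNat (pvEnc land q)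
    hrq.1 hrq.2 le_rfl
  rw [pvDec_one land p honep] at hcp
  rw [pvDec_one land q honeq] at hcq
  rcases hcp with hp1 | ⟨_, _, hp3⟩ <;> rcases hcq with hq1 | ⟨_, _, hq3⟩
  · -- both are their own roots: enc p = enc q
    rw [hp1, hq1] at h
    have : p = q := by
      have := congrArg (pvDec land) h
      rwa [pvDec_one land p honep, pvDec_one land q honeq] at this
    rw [this]
    exact Relation.ReflTransGen.refl
  · rw [hp1] at h
    rw [← h] at hq3
    rw [pvDec_one land p honep] at hq3
    exact pvConn_symm land _ _ hq3
  · rw [hq1] at h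
    rw [h] at hp3
    rw [pvDec_one land q honeq] at hp3
    exact hp3
  · rw [h] at hp3
    exact pvConn_trans land _ _ _ hp3 (pvConn_symm land _ _ hq3)

-- ---------- B-side: the size pass ----------

def pvSzP (land : List (List Int)) (P : List (Int × Int)) (sz : List Int) : Prop :=
  sz.length = (pvNN land).toNat ∧
  ∀ x : Int, 0 ≤ x → x < pvNN land →
    pvAt sz x = (((P.filter (pvOneB land)).countP
      (fun p' => decide (pvRoot (pvPar land) (pvEnc land p') = x))) : Int)

theorem pvSzStep (land : List (List Int)) (P : List (Int × Int)) (p : Int × Int)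
    (sz : List Int) (hp : p ∈ pvCells land) (hinv : pvSzP land P sz) :
    pvSzP land (P ++ [p]) (pvBBody2 land (pvPar land) sz p) := by
  obtain ⟨hP, hS, _⟩ := pvParInv land
  obtain ⟨hlen, hent⟩ := hinv
  by_cases hcell : pvCellB land p.1 p.2 = 1
  case neg =>
    have hnone : pvOneB land p ≠ true := by
      intro hcontra
      rw [pvOneB_iff] at hcontra
      rw [pvCellB_eq] at hcell
      exact hcell hcontra.2.2.2.2
    rw [pvBBody2, if_neg hcell]
    refine ⟨hlen, fun x hx0 hxN => ?_⟩
    rw [hent x hx0 hxN, List.filter_append]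
    have : [p].filter (pvOneB land) = [] := by
      simp [List.filter, Bool.eq_false_iff.mpr hnone]
    rw [this, List.append_nil]
  case pos =>
    have hone : pvOneB land p = true := by
      rw [pvOneB_iff]
      have := (pvMem_cells land p).mp hp
      rw [pvCellB_eq] at hcell
      exact ⟨this.1, this.2.1, this.2.2.1, this.2.2.2, hcell⟩
    have hrange := pvEnc_range land p hone
    have hroot := pvRoot_spec land (pvPar land) hP (pvEnc land p) hrange.1 hrange.2
    have hr : pvFind (pvPar land) ((pvPar land).length + 1) (p.1 * pvM land + p.2) =
        pvRoot (pvPar land) (pvEnc land p) := rfl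
    rw [pvBBody2, if_pos hcell]
    simp only [hr]
    have hset : PySem.List.pySetD sz (pvRoot (pvPar land) (pvEnc land p))
        (PySem.List.pyGetD sz (pvRoot (pvPar land) (pvEnc land p)) 0 + 1) =
        sz.set (pvRoot (pvPar land) (pvEnc land p)).toNat
          (pvAt sz (pvRoot (pvPar land) (pvEnc land p)) + 1) :=
      PySem.List.pySetD_of_nonneg sz _ hroot.1
    rw [hset]
    refine ⟨by rw [List.length_set]; exact hlen, fun x hx0 hxN => ?_⟩
    have hat := pvAt_set sz (pvRoot (pvPar land) (pvEnc land p))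
      (pvAt sz (pvRoot (pvPar land) (pvEnc land p)) + 1) x hroot.1 hx0
      (by push_cast; omega)
    rw [hat, List.filter_append]
    have hfp : [p].filter (pvOneB land) = [p] := by simp [List.filter, hone]
    rw [hfp, List.countP_append]
    have hcnt1 : [p].countP (fun p' => decide (pvRoot (pvPar land) (pvEnc land p') = x)) =
        if pvRoot (pvPar land) (pvEnc land p) = x then 1 else 0 := by
      by_cases h : pvRoot (pvPar land) (pvEnc land p) = x <;> simp [List.countP_cons, h]
    rw [hcnt1]
    by_cases hx : x = pvRoot (pvPar land) (pvEnc land p)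
    · subst hx
      rw [if_pos rfl, if_pos rfl, hent _ hx0 hxN]
      push_cast
      ring
    · rw [if_neg hx, if_neg (fun h => hx h.symm), hent x hx0 hxN]
      push_cast
      ring

theorem pvSzFold (land : List (List Int)) :
    ∀ (l P : List (Int × Int)) (sz : List Int),
      P ++ l = pvCells land → pvSzP land P sz →
      pvSzP land (pvCells land) (l.foldl (pvBBody2 land (pvPar land)) sz) := by
  intro l
  induction l with
  | nil => intro P sz hP hinv; rw [List.foldl_nil]; rw [List.append_nil] at hP; rwa [hP] at hinv
  | cons p l ih =>
      intro P sz hP hinv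
      rw [List.foldl_cons]
      have hp : p ∈ pvCells land := by
        rw [← hP]; exact List.mem_append_right _ List.mem_cons_self
      exact ih (P ++ [p]) _ (by simpa using hP) (pvSzStep land P p sz hp hinv)

theorem pvSzFinal (land : List (List Int)) :
    (pvSz land).length = (pvNN land).toNat ∧
    ∀ x : Int, 0 ≤ x → x < pvNN land →
      pvAt (pvSz land) x = (((pvOnes land).countP
        (fun p' => decide (pvRoot (pvPar land) (pvEnc land p') = x))) : Int) := by
  have hinit : pvSzP land [] (List.replicate ((pvN land).toNat * (pvM land).toNat) (0 : Int)) := by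
    refine ⟨by rw [List.length_replicate, pvNN_toNat], fun x hx0 hxN => ?_⟩
    unfold pvAt
    rw [PySem.List.pyGetD_of_nonneg _ _ hx0, List.getD_eq_getElem?_getD,
      List.getElem?_replicate, if_pos (by rw [← pvNN_toNat]; omega)]
    simp
  have := pvSzFold land (pvCells land) [] _ rfl hinit
  rw [← pvSz_flat] at this
  exact this

-- ---------- B-side: the column pass ----------

theorem pvFoldAdd_mem (C : Int → Prop) [DecidablePred C] (f : Int → Int) :
    ∀ (l : List Int) (s : PySem.Set Int), s.Nodup →
      ((l.foldl (fun s i => if C i then PySem.Set.add s (f i) else s) s).Nodup ∧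
       ∀ x, x ∈ l.foldl (fun s i => if C i then PySem.Set.add s (f i) else s) s ↔
         x ∈ s ∨ ∃ i ∈ l, C i ∧ x = f i) := by
  intro l
  induction l with
  | nil => intro s hnd; exact ⟨hnd, by simp⟩
  | cons i l ih =>
      intro s hnd
      rw [List.foldl_cons]
      by_cases hC : C i
      · rw [if_pos hC]
        obtain ⟨c1, c2⟩ := ih (PySem.Set.add s (f i)) (PySem.Set.nodup_add s (f i) hnd)
        refine ⟨c1, fun x => ?_⟩
        rw [c2, PySem.Set.mem_add]
        constructor
        · rintro ((h | rfl) | ⟨i', h1, h2, h3⟩)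
          · exact Or.inl h
          · exact Or.inr ⟨i, List.mem_cons_self, hC, rfl⟩
          · exact Or.inr ⟨i', List.mem_cons_of_mem _ h1, h2, h3⟩
        · rintro (h | ⟨i', h1, h2, h3⟩)
          · exact Or.inl (Or.inl h)
          · rcases List.mem_cons.mp h1 with rfl | h1
            · exact Or.inl (Or.inr h3)
            · exact Or.inr ⟨i', h1, h2, h3⟩
      · rw [if_neg hC]
        obtain ⟨c1, c2⟩ := ih s hnd
        refine ⟨c1, fun x => ?_⟩
        rw [c2]
        constructor
        · rintro (h | ⟨i', h1, h2, h3⟩)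
          · exact Or.inl h
          · exact Or.inr ⟨i', List.mem_cons_of_mem _ h1, h2, h3⟩
        · rintro (h | ⟨i', h1, h2, h3⟩)
          · exact Or.inl h
          · rcases List.mem_cons.mp h1 with rfl | h1
            · exact absurd h2 hC
            · exact Or.inr ⟨i', h1, h2, h3⟩

theorem pvSumRoots (land : List (List Int)) :
    ∀ (rs : List Int), rs.Nodup → (∀ r ∈ rs, 0 ≤ r ∧ r < pvNN land) →
    (rs.map (fun r => PySem.List.pyGetD (pvSz land) r 0)).sum =
      (((pvOnes land).countP
        (fun p => decide (pvRoot (pvPar land) (pvEnc land p) ∈ rs))) : Int) := by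
  intro rs
  induction rs with
  | nil => intro _ _; simp
  | cons r rs ih =>
      intro hnd hrange
      have hr := hrange r List.mem_cons_self
      rw [List.map_cons, List.sum_cons,
        ih hnd.of_cons (fun r' hr' => hrange r' (List.mem_cons_of_mem _ hr'))]
      have hszr := (pvSzFinal land).2 r hr.1 hr.2
      unfold pvAt at hszr
      rw [hszr]
      have hcongr : (pvOnes land).countP
          (fun p => decide (pvRoot (pvPar land) (pvEnc land p) ∈ r :: rs)) =
          (pvOnes land).countP
          (fun p => decide (pvRoot (pvPar land) (pvEnc land p) = r) ||
                    decide (pvRoot (pvPar land) (pvEnc land p) ∈ rs)) := by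
        apply List.countP_congr
        intro p _
        simp [List.mem_cons]
      rw [hcongr, pvCountP_disj]
      · push_cast; ring
      · intro p _
        rintro ⟨h1, h2⟩
        rw [decide_eq_true_iff] at h1 h2
        rw [h1] at h2
        exact (List.nodup_cons.mp hnd).1 h2

theorem pvColTot (land : List (List Int)) (best j : Int)
    (hj0 : 0 ≤ j) (hjm : j < pvM land) :
    pvBBody3 land best j = max best (pvColT land j) := by
  obtain ⟨hP, hS, _⟩ := pvParInv land
  unfold pvBBody3
  obtain ⟨rnd, rmem⟩ := pvFoldAdd_mem (fun i => pvCellB land i j = 1)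
    (fun i => pvFind (pvPar land) ((pvPar land).length + 1) (i * pvM land + j))
    (PySem.List.pyRange 0 (pvN land) 1) ([] : PySem.Set Int) List.nodup_nil
  set roots := (PySem.List.pyRange 0 (pvN land) 1).foldl
    (fun s i => if pvCellB land i j = 1
                then PySem.Set.add s (pvFind (pvPar land) ((pvPar land).length + 1)
                  (i * pvM land + j)) else s) ([] : PySem.Set Int) with hroots
  have hone_of : ∀ i : Int, 0 ≤ i → i < pvN land → pvCellB land i j = 1 →
      pvOneB land (i, j) = true := by
    intro i h1 h2 h3
    rw [pvOneB_iff]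
    rw [pvCellB_eq] at h3
    exact ⟨h1, h2, hj0, hjm, h3⟩
  have hrange : ∀ r ∈ roots, 0 ≤ r ∧ r < pvNN land := by
    intro r hr
    rcases (rmem r).mp hr with h | ⟨i, h1, h2, h3⟩
    · simp at h
    · rw [PySem.List.mem_pyRange_one] at h1
      have honei := hone_of i h1.1 h1.2 h2
      have := pvEnc_range land (i, j) honei
      have hrr := pvRoot_spec land (pvPar land) hP (pvEnc land (i, j)) this.1 this.2
      have hfi : pvFind (pvPar land) ((pvPar land).length + 1) (i * pvM land + j) =
          pvRoot (pvPar land) (pvEnc land (i, j)) := rfl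
      rw [h3, hfi]
      exact ⟨hrr.1, hrr.2.2.1⟩
  have htot : roots.foldl (fun acc r => acc + PySem.List.pyGetD (pvSz land) r 0) 0 =
      (((pvOnes land).countP
        (fun p => decide (pvRoot (pvPar land) (pvEnc land p) ∈ roots))) : Int) := by
    rw [PySem.List.foldl_add, zero_add]
    exact pvSumRoots land roots rnd hrange
  have hmemiff : ∀ p ∈ pvOnes land,
      (decide (pvRoot (pvPar land) (pvEnc land p) ∈ roots) = true) ↔ pvTouchD land j p = true := by
    intro p hp
    have honep : pvOneB land p = true := (List.mem_filter.mp hp).2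
    rw [decide_eq_true_iff, pvTouchD_iff, rmem]
    constructor
    · rintro (h | ⟨i, h1, h2, h3⟩)
      · simp at h
      · rw [PySem.List.mem_pyRange_one] at h1
        have honei := hone_of i h1.1 h1.2 h2
        have hfi : pvFind (pvPar land) ((pvPar land).length + 1) (i * pvM land + j) =
            pvRoot (pvPar land) (pvEnc land (i, j)) := rfl
        rw [hfi] at h3
        exact ⟨(i, j), pvConn_of_rootEq land p (i, j) honep honei h3, rfl⟩
    · rintro ⟨q, hconn, hq2⟩
      have honeq : pvOneB land q = true := pvConn_one land p q hconn honep
      obtain ⟨g1, g2, g3, g4, g5⟩ := (pvOneB_iff land q).mp honeq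
      refine Or.inr ⟨q.1, ?_, ?_, ?_⟩
      · rw [PySem.List.mem_pyRange_one]; exact ⟨g1, g2⟩
      · rw [pvCellB_eq]
        have : (q.1, j) = q := by
          rcases q with ⟨qa, qb⟩; simp at hq2 ⊢; omega
        rw [show pvCellA land q.1 j = pvCellA land q.1 q.2 by rw [hq2]]
        exact g5
      · have hfi : pvFind (pvPar land) ((pvPar land).length + 1) (q.1 * pvM land + j) =
            pvRoot (pvPar land) (q.1 * pvM land + j) := rfl
        rw [hfi]
        have hencq : pvEnc land q = q.1 * pvM land + j := by
          unfold pvEnc; rw [hq2]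
        rw [← hencq]
        exact pvRootEq_conn land p q honep hconn
  have hcnt : (pvOnes land).countP
      (fun p => decide (pvRoot (pvPar land) (pvEnc land p) ∈ roots)) =
      (pvOnes land).countP (fun p => pvTouchD land j p) :=
    List.countP_congr hmemiff
  show max best (roots.foldl (fun acc r => acc + PySem.List.pyGetD (pvSz land) r 0) 0) =
    max best (pvColT land j)
  rw [htot, hcnt]
  rfl

-- ---------- B = canon ----------

theorem pvB_canon (land : List (List Int)) (h : Pre_solution land) :
    solution_alt land = pvCanon land := by
  rw [pvSolutionAlt_eq]
  unfold pvCanon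
  rw [List.foldl_map]
  apply PySem.List.foldl_congr_mem
  intro acc j hjmem
  rw [PySem.List.mem_pyRange_one] at hjmem
  exact pvColTot land acc j hjmem.1 hjmem.2


-- ===== VERDICT (by name: the statement is the Claim_ definition above) =====
theorem solution_spec : Claim_equal_solution := by
  intro land _ hpre
  unfold Spec_solution
  rw [pvA_canon land hpre, pvB_canon land hpre]
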